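-- pv_equiv track=rewrite | github.com/jiwon-tech-innovation/Daily_Problem_Solving | jungbogeon/PGM_258712/solution.py | solution
-- ===== SOURCE A (Python) =====
-- def solution(friends, gifts):
--
--     # 1. 누가 누구에게 선물 받았는지 저장
--
--     send_gift = {}
--     for name in friends:
--         send_gift[name] = {}
--         for friend in friends:
--             if name != friend:
--                 send_gift[name][friend] = 0
--
--     # 2. 준 선물, 받은 선물
--
--     for gift in gifts:
--         gift_result = gift.split()
--         send_gift[gift_result[1]][gift_result[0]] += 1
--
--     # 3. 1번에서 저장한 데이터를 토대로 2번 재수정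
--
--     result_gift_log = {}
--
--     for name, gift_log in send_gift.items():
--         result_gift_log[name] = {}
--         result_gift_log[name]['send_gift_count'] = 0
--         result_gift_log[name]['in_gift_count'] = 0
--         result_gift_log[name]['gift_futures_count'] = 0
--
--     # 준 선물, 받은 선물 계산
--
--     for name, gift_log in send_gift.items():
--         for friend_name, friend_gift_count in gift_log.items():
--             result_gift_log[friend_name]['send_gift_count'] += friend_gift_count
--             result_gift_log[name]['in_gift_count'] += friend_gift_count
--
--     # 선물 지수 계산
--
--     for name, gift_result in result_gift_log.items():
--         result_gift_log[name]['gift_futures_count'] = gift_result['send_gift_count'] - gift_result['in_gift_count']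
--
--     # 결국 return 해야 하는건 다음달에 "가장 많은 선물을 받는 친구"가 받을 "선물의 수"
--
--     # 1:1 매칭으로 선물을 더 적게 주면 '적게 준 친구' 가 '많이 준 친구' 에게 1
--     # 여기서 오고간게 같다면 선물 지수로 더 '낮은 친구' 가 '높은 친구' 에게 1
--
--     result = {}
--
--     for my_name in send_gift:
--         result[my_name] = 0
--
--     for my_name, my_gift_log in send_gift.items():
--
--         for friend_name, send_your_gift_count in my_gift_log.items():
--             if send_gift[my_name][friend_name] < send_gift[friend_name][my_name]:
--                 result[my_name] += 1
--             elif send_gift[my_name][friend_name] == send_gift[friend_name][my_name]: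
--                 if result_gift_log[my_name]['gift_futures_count'] > result_gift_log[friend_name]['gift_futures_count']:
--                     result[my_name] += 1
--
--     answer = []
--
--     for value in result.values():
--         answer.append(value)
--
--     return max(answer)
--
-- result = 2
-- ===== SOURCE B (Python) =====
-- def solution(friends, gifts):
--     # One pass over gifts: directed pair counts and each person's gift index.
--     pair = {}
--     idx = {}
--     for g in gifts:
--         t = g.split()
--         a, b = t[0], t[1]
--         pair[(a, b)] = pair.get((a, b), 0) + 1
--         idx[a] = idx.get(a, 0) + 1
--         idx[b] = idx.get(b, 0) - 1
--     names = list(dict.fromkeys(friends))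
--     # multiplicity of each gift-index value among the friends
--     mult = {}
--     for n in names:
--         v = idx.get(n, 0)
--         mult[v] = mult.get(v, 0) + 1
--     # adjacency: who actually exchanged gifts with whom
--     adj = {}
--     for (a, b) in pair:
--         adj.setdefault(a, set()).add(b)
--         adj.setdefault(b, set()).add(a)
--     best = 0
--     for a in names:
--         ia = idx.get(a, 0)
--         # baseline: wins a would score if nobody had exchanged any gift,
--         # i.e. the number of friends with a strictly smaller gift index
--         s = sum(c for v, c in mult.items() if v < ia)
--         # correct only the pairs that really exchanged gifts
--         for b in adj.get(a, ()):
--             gave = pair.get((a, b), 0)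
--             got = pair.get((b, a), 0)
--             ib = idx.get(b, 0)
--             actual = 1 if (gave > got or (gave == got and ia > ib)) else 0
--             base = 1 if ia > ib else 0
--             s += actual - base
--         best = max(best, s)
--     return best
-- ===== Notes on version B (the rewrite author's own statement) =====
-- stated objective: alternative
-- what changed: Instead of comparing every ordered pair of friends head-to-head as A does, B scores each friend by a baseline count of friends with strictly smaller gift index (from a multiplicity table of index values) and then corrects only the sparse pairs that actually exchanged gifts, collected in an adjacency map.
import Mathlib
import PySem

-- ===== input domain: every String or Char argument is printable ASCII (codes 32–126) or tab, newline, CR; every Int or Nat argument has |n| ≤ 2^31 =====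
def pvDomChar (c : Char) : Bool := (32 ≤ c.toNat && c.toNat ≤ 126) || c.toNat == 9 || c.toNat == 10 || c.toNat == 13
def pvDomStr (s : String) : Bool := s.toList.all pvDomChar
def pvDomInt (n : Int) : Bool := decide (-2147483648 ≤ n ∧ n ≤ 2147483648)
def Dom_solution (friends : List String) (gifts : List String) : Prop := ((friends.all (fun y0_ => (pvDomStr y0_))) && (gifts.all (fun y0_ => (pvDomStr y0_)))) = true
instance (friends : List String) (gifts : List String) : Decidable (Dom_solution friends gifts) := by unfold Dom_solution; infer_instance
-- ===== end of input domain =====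

-- B replaces A's dense pairwise head-to-head comparison by a baseline count over gift-index
-- multiplicities corrected only on the pairs that actually exchanged gifts (objective: alternative).

-- ===== PORT A =====
-- Literal port of A. Python raises (KeyError/IndexError/ValueError) on malformed gifts or empty
-- friends; the total forms pyGetD/modify/getD and the `none => 0` fallback are reached only
-- outside Pre_solution, which excludes exactly those inputs.
def solution (friends : List String) (gifts : List String) : Int :=
  let send_gift : PySem.Dict String (PySem.Dict String Int) :=
    friends.foldl (fun sg name =>
      let inner : PySem.Dict String Int :=
        friends.foldl (fun inn friend =>
          if name ≠ friend then inn.insert friend 0 else inn) PySem.Dict.empty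
      sg.insert name inner) PySem.Dict.empty
  let send_gift := gifts.foldl (fun sg gift =>
      let gr := PySem.Str.split₀ gift
      sg.modify (PySem.List.pyGetD gr 1 "") PySem.Dict.empty
        (fun inn => inn.modify (PySem.List.pyGetD gr 0 "") 0 (· + 1))) send_gift
  let result_gift_log : PySem.Dict String (PySem.Dict String Int) :=
    send_gift.items.foldl (fun r p =>
      r.insert p.1
        (((PySem.Dict.empty.insert "send_gift_count" (0 : Int)).insert "in_gift_count" 0).insert
          "gift_futures_count" 0)) PySem.Dict.empty
  let result_gift_log := send_gift.items.foldl (fun r p =>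
      p.2.items.foldl (fun r q =>
        let r := r.modify q.1 PySem.Dict.empty (fun m => m.modify "send_gift_count" 0 (· + q.2))
        r.modify p.1 PySem.Dict.empty (fun m => m.modify "in_gift_count" 0 (· + q.2))) r)
      result_gift_log
  let result_gift_log := result_gift_log.items.foldl (fun r p =>
      r.modify p.1 PySem.Dict.empty (fun m =>
        m.insert "gift_futures_count"
          (m.getD "send_gift_count" 0 - m.getD "in_gift_count" 0))) result_gift_log
  let result : PySem.Dict String Int :=
    send_gift.keys.foldl (fun r n => r.insert n 0) PySem.Dict.empty
  let result := send_gift.items.foldl (fun r p =>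
      p.2.items.foldl (fun r q =>
        if (send_gift.getD p.1 PySem.Dict.empty).getD q.1 0 <
            (send_gift.getD q.1 PySem.Dict.empty).getD p.1 0 then
          r.modify p.1 0 (· + 1)
        else if (send_gift.getD p.1 PySem.Dict.empty).getD q.1 0 =
            (send_gift.getD q.1 PySem.Dict.empty).getD p.1 0 then
          if (result_gift_log.getD p.1 PySem.Dict.empty).getD "gift_futures_count" 0 >
              (result_gift_log.getD q.1 PySem.Dict.empty).getD "gift_futures_count" 0 then
            r.modify p.1 0 (· + 1)
          else r
        else r) r) result
  let answer := result.values.foldl (fun acc v => acc ++ [v]) ([] : List Int)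
  match PySem.List.max? answer (fun v => v) with
  | some v => v
  | none => 0

-- ===== PORT B =====
-- B-side helpers (the loop bodies of Source B, named so the proofs can talk about them)
def pvStepB (st : PySem.Dict (String × String) Int × PySem.Dict String Int) (g : String) :
    PySem.Dict (String × String) Int × PySem.Dict String Int :=
  let t := PySem.Str.split₀ g
  let a := PySem.List.pyGetD t 0 ""
  let b := PySem.List.pyGetD t 1 ""
  let pair := st.1.insert (a, b) (st.1.getD (a, b) 0 + 1)
  let idx := st.2.insert a (st.2.getD a 0 + 1)
  let idx := idx.insert b (idx.getD b 0 - 1)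
  (pair, idx)

def pvAdjStepB (ad : PySem.Dict String (PySem.Set String)) (p : String × String) :
    PySem.Dict String (PySem.Set String) :=
  let ad := ad.insert p.1 (PySem.Set.add (ad.getD p.1 PySem.Set.empty) p.2)
  ad.insert p.2 (PySem.Set.add (ad.getD p.2 PySem.Set.empty) p.1)

def solution_alt (friends : List String) (gifts : List String) : Int :=
  let st := gifts.foldl pvStepB (PySem.Dict.empty, PySem.Dict.empty)
  let pair := st.1
  let idx := st.2
  let names := PySem.List.dedup friends
  let mult := names.foldl (fun (m : PySem.Dict Int Int) n =>
      m.insert (idx.getD n 0) (m.getD (idx.getD n 0) 0 + 1)) PySem.Dict.empty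
  let adj := pair.keys.foldl pvAdjStepB PySem.Dict.empty
  names.foldl (fun best a =>
    let ia := idx.getD a 0
    let s := mult.items.foldl (fun s q => if q.1 < ia then s + q.2 else s) (0 : Int)
    let s := (adj.getD a PySem.Set.empty).foldl (fun s b =>
        let gave := pair.getD (a, b) 0
        let got := pair.getD (b, a) 0
        let ib := idx.getD b 0
        let actual : Int := if gave > got ∨ (gave = got ∧ ia > ib) then 1 else 0
        let base : Int := if ia > ib then 1 else 0
        s + (actual - base)) s
    max best s) 0

-- ===== PRECONDITION & SPEC =====
-- Pre_solution: exactly the inputs on which Python A returns normally: friends nonempty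
-- (else max([]) raises ValueError) and every gift splitting into at least two tokens whose
-- first two name distinct members of friends (else IndexError/KeyError).
def Pre_solution (friends : List String) (gifts : List String) : Prop :=
  friends ≠ [] ∧ ∀ g ∈ gifts,
    2 ≤ (PySem.Str.split₀ g).length ∧
    PySem.List.pyGetD (PySem.Str.split₀ g) 0 "" ∈ friends ∧
    PySem.List.pyGetD (PySem.Str.split₀ g) 1 "" ∈ friends ∧
    PySem.List.pyGetD (PySem.Str.split₀ g) 0 "" ≠ PySem.List.pyGetD (PySem.Str.split₀ g) 1 ""
instance (friends : List String) (gifts : List String) : Decidable (Pre_solution friends gifts) := by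
  unfold Pre_solution; infer_instance
def pvWitness_solution : List String × List String := (["muzi", "ryan"], ["muzi ryan"])
def Spec_solution (friends : List String) (gifts : List String) (out : Int) : Prop := out = solution_alt friends gifts
instance (friends : List String) (gifts : List String) (out : Int) : Decidable (Spec_solution friends gifts out) := by unfold Spec_solution; infer_instance

-- ===== CLAIM (what is proved, stated in full; the proofs are below) =====
def Claim_equal_solution : Prop := ∀ (friends : List String) (gifts : List String), Dom_solution friends gifts → Pre_solution friends gifts → Spec_solution friends gifts (solution friends gifts)

-- ===== LEMMAS AND PROOFS =====
-- Specification-layer values (proof helpers only)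
def pvTok0 (g : String) : String := PySem.List.pyGetD (PySem.Str.split₀ g) 0 ""
def pvTok1 (g : String) : String := PySem.List.pyGetD (PySem.Str.split₀ g) 1 ""
def pvCnt (gifts : List String) (x y : String) : Nat :=
  gifts.countP (fun g => pvTok1 g == x && pvTok0 g == y)
def pvGiv (gifts : List String) (x : String) : Nat := gifts.countP (fun g => pvTok0 g == x)
def pvRec (gifts : List String) (x : String) : Nat := gifts.countP (fun g => pvTok1 g == x)
def pvFut (gifts : List String) (x : String) : Int := (pvGiv gifts x : Int) - (pvRec gifts x : Int)
def pvCond (gifts : List String) (x y : String) : Bool :=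
  decide ((pvCnt gifts x y : Int) < (pvCnt gifts y x : Int)) ||
    (decide ((pvCnt gifts x y : Int) = (pvCnt gifts y x : Int)) &&
      decide (pvFut gifts x > pvFut gifts y))
def pvDs (friends : List String) : List String := PySem.Set.ofList friends
def pvScore (friends gifts : List String) (x : String) : Int :=
  (((pvDs friends).filter (fun y => decide (x ≠ y))).countP (pvCond gifts x) : Int)
def pvAnswer (friends gifts : List String) : Int :=
  ((pvDs friends).map (pvScore friends gifts)).foldl max 0

-- A's pipeline, named stage by stage (definitionally equal to the port's let-chain)
def pvInner (friends : List String) (name : String) : PySem.Dict String Int :=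
  friends.foldl (fun inn friend => if name ≠ friend then inn.insert friend 0 else inn)
    PySem.Dict.empty
def pvSg0 (friends : List String) : PySem.Dict String (PySem.Dict String Int) :=
  friends.foldl (fun sg name => sg.insert name (pvInner friends name)) PySem.Dict.empty
def pvSg (friends gifts : List String) : PySem.Dict String (PySem.Dict String Int) :=
  gifts.foldl (fun sg gift =>
    sg.modify (pvTok1 gift) PySem.Dict.empty
      (fun inn => inn.modify (pvTok0 gift) 0 (· + 1))) (pvSg0 friends)
def pvM0 : PySem.Dict String Int :=
  ((PySem.Dict.empty.insert "send_gift_count" (0 : Int)).insert "in_gift_count" 0).insert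
    "gift_futures_count" 0
def pvRgl0 (friends gifts : List String) : PySem.Dict String (PySem.Dict String Int) :=
  (pvSg friends gifts).items.foldl (fun r p => r.insert p.1 pvM0) PySem.Dict.empty
def pvRStep (my : String) :
    PySem.Dict String (PySem.Dict String Int) → (String × Int) →
      PySem.Dict String (PySem.Dict String Int) :=
  fun r q =>
    (r.modify q.1 PySem.Dict.empty (fun m => m.modify "send_gift_count" 0 (· + q.2))).modify my
      PySem.Dict.empty (fun m => m.modify "in_gift_count" 0 (· + q.2))
def pvRgl1 (friends gifts : List String) : PySem.Dict String (PySem.Dict String Int) :=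
  (pvSg friends gifts).items.foldl (fun r p => p.2.items.foldl (pvRStep p.1) r)
    (pvRgl0 friends gifts)
def pvRgl (friends gifts : List String) : PySem.Dict String (PySem.Dict String Int) :=
  (pvRgl1 friends gifts).items.foldl (fun r p =>
    r.modify p.1 PySem.Dict.empty (fun m =>
      m.insert "gift_futures_count" (m.getD "send_gift_count" 0 - m.getD "in_gift_count" 0)))
    (pvRgl1 friends gifts)
def pvRes0 (friends gifts : List String) : PySem.Dict String Int :=
  (pvSg friends gifts).keys.foldl (fun r n => r.insert n 0) PySem.Dict.empty
def pvRes (friends gifts : List String) : PySem.Dict String Int :=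
  (pvSg friends gifts).items.foldl (fun r p =>
    p.2.items.foldl (fun r q =>
      if ((pvSg friends gifts).getD p.1 PySem.Dict.empty).getD q.1 0 <
          ((pvSg friends gifts).getD q.1 PySem.Dict.empty).getD p.1 0 then
        r.modify p.1 0 (· + 1)
      else if ((pvSg friends gifts).getD p.1 PySem.Dict.empty).getD q.1 0 =
          ((pvSg friends gifts).getD q.1 PySem.Dict.empty).getD p.1 0 then
        if ((pvRgl friends gifts).getD p.1 PySem.Dict.empty).getD "gift_futures_count" 0 >
            ((pvRgl friends gifts).getD q.1 PySem.Dict.empty).getD "gift_futures_count" 0 then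
          r.modify p.1 0 (· + 1)
        else r
      else r) r) (pvRes0 friends gifts)

theorem pv_solution_pipeline (friends gifts : List String) :
    solution friends gifts =
      (match PySem.List.max?
          ((pvRes friends gifts).values.foldl (fun acc v => acc ++ [v]) ([] : List Int))
          (fun v => v) with
        | some v => v
        | none => 0) := rfl

-- generic dict-fold lemmas for these two programs
theorem pv_get?_foldl_insert_fun {ν : Type} (l : List String) (v : String → ν)
    (d : PySem.Dict String ν) (x : String) :
    (l.foldl (fun d n => d.insert n (v n)) d).get? x = if x ∈ l then some (v x) else d.get? x := by
  induction l generalizing d with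
  | nil => simp
  | cons n t ih =>
    simp only [List.foldl_cons]
    rw [ih, PySem.Dict.get?_insert]
    by_cases hx : x ∈ t <;> by_cases hxn : x = n <;> simp [hx, hxn]

theorem pv_getD_foldl_insert_fun {ν : Type} (l : List String) (v : String → ν)
    (d : PySem.Dict String ν) (x : String) (d0 : ν) :
    (l.foldl (fun d n => d.insert n (v n)) d).getD x d0 =
      if x ∈ l then v x else d.getD x d0 := by
  rw [PySem.Dict.getD_eq_get?_getD, pv_get?_foldl_insert_fun, PySem.Dict.getD_eq_get?_getD]
  by_cases hx : x ∈ l <;> simp [hx]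

theorem pv_update_absorb (s : PySem.Set String) (xs : List String)
    (h : ∀ x ∈ xs, x ∈ s) : PySem.Set.update s xs = s := by
  rw [PySem.Set.update_eq_append_filter]
  have hnil : (PySem.Set.ofList xs).filter (fun y => !s.contains y) = [] := by
    rw [List.filter_eq_nil_iff]
    intro a ha
    have := (PySem.Set.mem_ofList xs a).mp ha
    simp [h a this]
  rw [hnil, List.append_nil]

theorem pv_ofList_filter (l : List String) (p : String → Bool) :
    PySem.Set.ofList (l.filter p) = (PySem.Set.ofList l).filter p := by
  induction l using List.reverseRecOn with
  | nil => simp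
  | append_singleton xs a ih =>
    by_cases hp : p a
    · rw [List.filter_append, List.filter_cons_of_pos hp, List.filter_nil,
        PySem.Set.ofList_append_singleton, PySem.Set.ofList_append_singleton,
        PySem.Set.add_eq_ite, PySem.Set.add_eq_ite, ih]
      by_cases ha : a ∈ xs
      · have h1 : a ∈ List.filter p (PySem.Set.ofList xs) :=
          List.mem_filter.mpr ⟨(PySem.Set.mem_ofList xs a).mpr ha, hp⟩
        have h2 : a ∈ PySem.Set.ofList xs := (PySem.Set.mem_ofList xs a).mpr ha
        rw [if_pos h1, if_pos h2]
      · have h1 : a ∉ List.filter p (PySem.Set.ofList xs) := by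
          intro hmem
          exact ha ((PySem.Set.mem_ofList xs a).mp (List.mem_filter.mp hmem).1)
        have h2 : a ∉ PySem.Set.ofList xs := fun hmem => ha ((PySem.Set.mem_ofList xs a).mp hmem)
        rw [if_neg h1, if_neg h2, List.filter_append, List.filter_cons_of_pos hp,
          List.filter_nil]
    · rw [List.filter_append, List.filter_cons_of_neg hp, List.filter_nil, List.append_nil,
        PySem.Set.ofList_append_singleton, PySem.Set.add_eq_ite, ih]
      by_cases ha : a ∈ PySem.Set.ofList xs
      · rw [if_pos ha]
      · rw [if_neg ha, List.filter_append, List.filter_cons_of_neg hp, List.filter_nil,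
          List.append_nil]

theorem pv_cnt_cons (g : String) (t : List String) (x y : String) :
    (pvCnt (g :: t) x y : Int) =
      (pvCnt t x y : Int) + (if x = pvTok1 g ∧ y = pvTok0 g then 1 else 0) := by
  simp only [pvCnt, List.countP_cons]
  have hb : ((pvTok1 g == x && pvTok0 g == y) = true) ↔ (x = pvTok1 g ∧ y = pvTok0 g) := by
    rw [Bool.and_eq_true, beq_iff_eq, beq_iff_eq]
    exact ⟨fun ⟨u, v⟩ => ⟨u.symm, v.symm⟩, fun ⟨u, v⟩ => ⟨u.symm, v.symm⟩⟩
  by_cases h : x = pvTok1 g ∧ y = pvTok0 g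
  · rw [if_pos (hb.mpr h), if_pos h]; push_cast; ring
  · rw [if_neg (fun hh => h (hb.mp hh)), if_neg h]; push_cast; ring

theorem pv_cell_fold (gs : List String) :
    ∀ (d : PySem.Dict String (PySem.Dict String Int)) (x y : String),
      (((gs.foldl (fun sg gift =>
          sg.modify (pvTok1 gift) PySem.Dict.empty
            (fun inn => inn.modify (pvTok0 gift) 0 (· + 1))) d).getD x
          PySem.Dict.empty).getD y 0) =
        ((d.getD x PySem.Dict.empty).getD y 0) + (pvCnt gs x y : Int) := by
  induction gs with
  | nil => intro d x y; simp [pvCnt]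
  | cons g t ih =>
    intro d x y
    simp only [List.foldl_cons]
    rw [ih, pv_cnt_cons, PySem.Dict.getD_modify]
    by_cases hx : x = pvTok1 g
    · rw [if_pos hx, PySem.Dict.getD_modify]
      by_cases hy : y = pvTok0 g
      · simp [hx, hy]; omega
      · simp [hx, hy]
    · simp [hx]

theorem pv_innerKeys_fold (gs : List String) (KI : String → List String) :
    ∀ (d : PySem.Dict String (PySem.Dict String Int)),
      (∀ x, (d.getD x PySem.Dict.empty).keys = KI x) →
      (∀ g ∈ gs, pvTok0 g ∈ KI (pvTok1 g)) →
      ∀ x, ((gs.foldl (fun sg gift =>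
          sg.modify (pvTok1 gift) PySem.Dict.empty
            (fun inn => inn.modify (pvTok0 gift) 0 (· + 1))) d).getD x
          PySem.Dict.empty).keys = KI x := by
  induction gs with
  | nil => intro d hd _ x; exact hd x
  | cons g t ih =>
    intro d hd hg x
    simp only [List.foldl_cons]
    refine ih _ ?_ (fun g' hg' => hg g' (List.mem_cons_of_mem _ hg')) x
    intro x'
    rw [PySem.Dict.getD_modify]
    by_cases hx : x' = pvTok1 g
    · rw [if_pos hx, hx]
      have hcont : ((d.getD (pvTok1 g) PySem.Dict.empty).contains (pvTok0 g)) = true := by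
        rw [PySem.Dict.contains_iff_mem_keys, hd]
        exact hg g List.mem_cons_self
      rw [PySem.Dict.keys_modify, PySem.Dict.keys_insert_of_contains _ _ hcont]
      exact hd _
    · rw [if_neg hx]; exact hd x'

def pvKI (friends : List String) (x : String) : List String :=
  if x ∈ friends then (pvDs friends).filter (fun y => decide (x ≠ y)) else []

theorem pv_inner_eq_filter (friends : List String) (name : String) :
    pvInner friends name =
      List.foldl (fun (inn : PySem.Dict String Int) friend => inn.insert friend 0)
        PySem.Dict.empty (friends.filter (fun y => decide (name ≠ y))) :=
  PySem.List.foldl_ite_eq_foldl_filter _ _ _ _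

theorem pv_inner_getD (friends : List String) (name y : String) :
    (pvInner friends name).getD y 0 = 0 := by
  rw [pv_inner_eq_filter, pv_getD_foldl_insert_fun (v := fun _ => (0 : Int))]
  split <;> simp

theorem pv_inner_keys (friends : List String) (name : String) :
    (pvInner friends name).keys = (pvDs friends).filter (fun y => decide (name ≠ y)) := by
  rw [pv_inner_eq_filter]
  have h1 : (List.foldl (fun (inn : PySem.Dict String Int) friend => inn.insert friend 0)
      PySem.Dict.empty (friends.filter (fun y => decide (name ≠ y)))).keys =
      PySem.Set.update (PySem.Dict.empty :
        PySem.Dict String Int).keys (friends.filter (fun y => decide (name ≠ y))) :=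
    PySem.Dict.keys_foldl_insert _ (fun _ _ => (0 : Int)) _
  rw [h1, PySem.Dict.keys_empty]
  have h2 : PySem.Set.update ([] : List String)
      (friends.filter (fun y => decide (name ≠ y))) =
      PySem.Set.ofList (friends.filter (fun y => decide (name ≠ y))) :=
    PySem.Set.update_empty _
  rw [h2, pv_ofList_filter]
  rfl

theorem pv_sg0_get? (friends : List String) (x : String) :
    (pvSg0 friends).get? x = if x ∈ friends then some (pvInner friends x) else none := by
  unfold pvSg0
  rw [pv_get?_foldl_insert_fun (v := pvInner friends)]
  split <;> simp

theorem pv_sg0_getD (friends : List String) (x : String) :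
    (pvSg0 friends).getD x PySem.Dict.empty =
      if x ∈ friends then pvInner friends x else PySem.Dict.empty := by
  rw [PySem.Dict.getD_eq_get?_getD, pv_sg0_get?]
  split <;> simp

theorem pv_sg0_cell (friends : List String) (x y : String) :
    ((pvSg0 friends).getD x PySem.Dict.empty).getD y 0 = 0 := by
  rw [pv_sg0_getD]
  split
  · exact pv_inner_getD friends x y
  · simp

theorem pv_sg0_innerKeys (friends : List String) (x : String) :
    ((pvSg0 friends).getD x PySem.Dict.empty).keys = pvKI friends x := by
  rw [pv_sg0_getD, pvKI]
  split
  · exact pv_inner_keys friends x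
  · simp [PySem.Dict.keys_empty]

theorem pv_sg0_keys (friends : List String) : (pvSg0 friends).keys = pvDs friends := by
  have h1 : (pvSg0 friends).keys =
      PySem.Set.update (PySem.Dict.empty :
        PySem.Dict String (PySem.Dict String Int)).keys friends :=
    PySem.Dict.keys_foldl_insert friends (fun _ name => pvInner friends name) _
  rw [h1, PySem.Dict.keys_empty]
  exact PySem.Set.update_empty friends

theorem pv_sg_cell (friends gifts : List String) (x y : String) :
    ((pvSg friends gifts).getD x PySem.Dict.empty).getD y 0 = (pvCnt gifts x y : Int) := by
  unfold pvSg
  rw [pv_cell_fold, pv_sg0_cell, zero_add]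

theorem pv_sg_keys (friends gifts : List String)
    (hg : ∀ g ∈ gifts, pvTok0 g ∈ friends ∧ pvTok1 g ∈ friends ∧ pvTok0 g ≠ pvTok1 g) :
    (pvSg friends gifts).keys = pvDs friends := by
  have h1 : (pvSg friends gifts).keys =
      PySem.Set.update (pvSg0 friends).keys (gifts.map pvTok1) :=
    PySem.Dict.keys_foldl_modify_key gifts pvTok1 PySem.Dict.empty
      (fun _ gift inn => inn.modify (pvTok0 gift) 0 (· + 1)) (pvSg0 friends)
  rw [h1, pv_sg0_keys]
  apply pv_update_absorb
  intro x hx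
  obtain ⟨g, hgm, hgx⟩ := List.mem_map.mp hx
  rw [pvDs, PySem.Set.mem_ofList]
  exact hgx ▸ (hg g hgm).2.1

theorem pv_sg_innerKeys (friends gifts : List String)
    (hg : ∀ g ∈ gifts, pvTok0 g ∈ friends ∧ pvTok1 g ∈ friends ∧ pvTok0 g ≠ pvTok1 g)
    (x : String) :
    ((pvSg friends gifts).getD x PySem.Dict.empty).keys = pvKI friends x := by
  unfold pvSg
  refine pv_innerKeys_fold gifts (pvKI friends) _ (pv_sg0_innerKeys friends) ?_ x
  intro g hgm
  obtain ⟨h0, h1, hne⟩ := hg g hgm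
  rw [pvKI, if_pos h1, List.mem_filter]
  refine ⟨(PySem.Set.mem_ofList friends _).mpr h0, ?_⟩
  simpa using hne.symm

theorem pv_ds_nodup (friends : List String) : (pvDs friends).Nodup :=
  PySem.Set.nodup_ofList friends

theorem pv_KI_nodup (friends : List String) (x : String) : (pvKI friends x).Nodup := by
  rw [pvKI]; split
  · exact (pv_ds_nodup friends).filter _
  · exact List.nodup_nil

theorem pv_mem_KI (friends : List String) (x y : String) (hx : x ∈ friends) :
    y ∈ pvKI friends x ↔ y ∈ pvDs friends ∧ x ≠ y := by
  rw [pvKI, if_pos hx, List.mem_filter]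
  simp

theorem pv_sg_items (friends gifts : List String)
    (hg : ∀ g ∈ gifts, pvTok0 g ∈ friends ∧ pvTok1 g ∈ friends ∧ pvTok0 g ≠ pvTok1 g) :
    (pvSg friends gifts).items =
      (pvDs friends).map (fun k => (k, (pvSg friends gifts).getD k PySem.Dict.empty)) := by
  have hnd : (pvSg friends gifts).keys.Nodup := by
    rw [pv_sg_keys friends gifts hg]; exact pv_ds_nodup friends
  rw [PySem.Dict.items_eq_map_keys _ hnd PySem.Dict.empty, pv_sg_keys friends gifts hg]

theorem pv_row_items (friends gifts : List String)
    (hg : ∀ g ∈ gifts, pvTok0 g ∈ friends ∧ pvTok1 g ∈ friends ∧ pvTok0 g ≠ pvTok1 g)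
    (x : String) :
    ((pvSg friends gifts).getD x PySem.Dict.empty).items =
      (pvKI friends x).map (fun j => (j, (pvCnt gifts x j : Int))) := by
  have hnd : ((pvSg friends gifts).getD x PySem.Dict.empty).keys.Nodup := by
    rw [pv_sg_innerKeys friends gifts hg x]; exact pv_KI_nodup friends x
  rw [PySem.Dict.items_eq_map_keys _ hnd 0, pv_sg_innerKeys friends gifts hg x]
  exact List.map_congr_left (fun j _ => by rw [pv_sg_cell])
theorem pv_rstep_send (my : String) (l : List (String × Int)) :
    ∀ (r : PySem.Dict String (PySem.Dict String Int)) (x : String),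
      (((l.foldl (pvRStep my) r).getD x PySem.Dict.empty).getD "send_gift_count" 0) =
        ((r.getD x PySem.Dict.empty).getD "send_gift_count" 0) +
          ((l.filter (fun q => q.1 == x)).map (·.2)).sum := by
  induction l with
  | nil => intro r x; simp
  | cons q t ih =>
    intro r x
    simp only [List.foldl_cons]
    rw [ih]
    have hstep : ((pvRStep my r q).getD x PySem.Dict.empty).getD "send_gift_count" 0 =
        ((r.getD x PySem.Dict.empty).getD "send_gift_count" 0) +
          (if q.1 = x then q.2 else 0) := by
      unfold pvRStep
      rw [PySem.Dict.getD_modify]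
      by_cases hxm : x = my
      · rw [if_pos hxm, PySem.Dict.getD_modify_of_ne _ 0 _
          (by decide : ("send_gift_count" : String) ≠ "in_gift_count"), ← hxm,
          PySem.Dict.getD_modify]
        by_cases hxq : x = q.1
        · rw [if_pos hxq, PySem.Dict.getD_modify_self, ← hxq, if_pos rfl]
        · rw [if_neg hxq, if_neg (fun h => hxq h.symm), add_zero]
      · rw [if_neg hxm, PySem.Dict.getD_modify]
        by_cases hxq : x = q.1
        · rw [if_pos hxq, PySem.Dict.getD_modify_self, ← hxq, if_pos rfl]
        · rw [if_neg hxq, if_neg (fun h => hxq h.symm), add_zero]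
    rw [hstep]
    by_cases hq : q.1 = x <;> simp [List.filter_cons, hq] <;> omega

theorem pv_rstep_in (my : String) (l : List (String × Int)) :
    ∀ (r : PySem.Dict String (PySem.Dict String Int)) (x : String),
      (((l.foldl (pvRStep my) r).getD x PySem.Dict.empty).getD "in_gift_count" 0) =
        ((r.getD x PySem.Dict.empty).getD "in_gift_count" 0) +
          (if x = my then (l.map (·.2)).sum else 0) := by
  induction l with
  | nil => intro r x; simp
  | cons q t ih =>
    intro r x
    simp only [List.foldl_cons, List.map_cons, List.sum_cons]
    rw [ih]
    have hstep : ((pvRStep my r q).getD x PySem.Dict.empty).getD "in_gift_count" 0 =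
        ((r.getD x PySem.Dict.empty).getD "in_gift_count" 0) +
          (if x = my then q.2 else 0) := by
      unfold pvRStep
      rw [PySem.Dict.getD_modify]
      by_cases hxm : x = my
      · rw [if_pos hxm, PySem.Dict.getD_modify_self, ← hxm, PySem.Dict.getD_modify]
        by_cases hxq : x = q.1
        · rw [if_pos hxq, PySem.Dict.getD_modify_of_ne _ 0 _
            (by decide : ("in_gift_count" : String) ≠ "send_gift_count"), ← hxq,
            if_pos rfl]
        · rw [if_neg hxq, if_pos rfl]
      · rw [if_neg hxm, PySem.Dict.getD_modify, if_neg hxm, add_zero]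
        by_cases hxq : x = q.1
        · rw [if_pos hxq, PySem.Dict.getD_modify_of_ne _ 0 _
            (by decide : ("in_gift_count" : String) ≠ "send_gift_count"), ← hxq]
        · rw [if_neg hxq]
    rw [hstep]
    by_cases hx : x = my <;> simp [hx] <;> omega

theorem pv_rstep_keys (my : String) (l : List (String × Int)) :
    ∀ (r : PySem.Dict String (PySem.Dict String Int)),
      my ∈ r.keys → (∀ q ∈ l, q.1 ∈ r.keys) → (l.foldl (pvRStep my) r).keys = r.keys := by
  induction l with
  | nil => intro r _ _; rfl
  | cons q t ih =>
    intro r hmy hq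
    simp only [List.foldl_cons]
    have hk1 : (r.modify q.1 PySem.Dict.empty
        (fun m => m.modify "send_gift_count" 0 (· + q.2))).keys = r.keys := by
      rw [PySem.Dict.keys_modify, PySem.Dict.keys_insert_of_contains _ _
        ((PySem.Dict.contains_iff_mem_keys _ _).mpr (hq q List.mem_cons_self))]
    have hk2 : (pvRStep my r q).keys = r.keys := by
      unfold pvRStep
      rw [PySem.Dict.keys_modify, PySem.Dict.keys_insert_of_contains, hk1]
      rw [PySem.Dict.contains_iff_mem_keys, hk1]
      exact hmy
    rw [ih _ (hk2 ▸ hmy) (fun q' hq' => hk2 ▸ hq q' (List.mem_cons_of_mem _ hq')), hk2]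

theorem pv_outer_send (L : List (String × PySem.Dict String Int)) :
    ∀ (r : PySem.Dict String (PySem.Dict String Int)) (x : String),
      (((L.foldl (fun r p => p.2.items.foldl (pvRStep p.1) r) r).getD x
          PySem.Dict.empty).getD "send_gift_count" 0) =
        ((r.getD x PySem.Dict.empty).getD "send_gift_count" 0) +
          (L.map (fun p => ((p.2.items.filter (fun q => q.1 == x)).map (·.2)).sum)).sum := by
  induction L with
  | nil => intro r x; simp
  | cons p t ih =>
    intro r x
    simp only [List.foldl_cons, List.map_cons, List.sum_cons]
    rw [ih, pv_rstep_send]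
    omega

theorem pv_outer_in (L : List (String × PySem.Dict String Int)) :
    ∀ (r : PySem.Dict String (PySem.Dict String Int)) (x : String),
      (((L.foldl (fun r p => p.2.items.foldl (pvRStep p.1) r) r).getD x
          PySem.Dict.empty).getD "in_gift_count" 0) =
        ((r.getD x PySem.Dict.empty).getD "in_gift_count" 0) +
          (L.map (fun p => if x = p.1 then (p.2.items.map (·.2)).sum else 0)).sum := by
  induction L with
  | nil => intro r x; simp
  | cons p t ih =>
    intro r x
    simp only [List.foldl_cons, List.map_cons, List.sum_cons]
    rw [ih, pv_rstep_in]
    omega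

theorem pv_outer_keys (L : List (String × PySem.Dict String Int)) :
    ∀ (r : PySem.Dict String (PySem.Dict String Int)),
      (∀ p ∈ L, p.1 ∈ r.keys) → (∀ p ∈ L, ∀ q ∈ p.2.items, q.1 ∈ r.keys) →
      (L.foldl (fun r p => p.2.items.foldl (pvRStep p.1) r) r).keys = r.keys := by
  induction L with
  | nil => intro r _ _; rfl
  | cons p t ih =>
    intro r h1 h2
    simp only [List.foldl_cons]
    have hk : (p.2.items.foldl (pvRStep p.1) r).keys = r.keys :=
      pv_rstep_keys p.1 p.2.items r (h1 p List.mem_cons_self) (h2 p List.mem_cons_self)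
    rw [ih _ (fun p' hp' => hk ▸ h1 p' (List.mem_cons_of_mem _ hp'))
      (fun p' hp' q hq => hk ▸ h2 p' (List.mem_cons_of_mem _ hp') q hq), hk]

theorem pv_sum_zero {α : Type} (l : List α) (f : α → Int) (h : ∀ a ∈ l, f a = 0) :
    (l.map f).sum = 0 := by
  induction l with
  | nil => rfl
  | cons a t ih =>
    simp [h a List.mem_cons_self, ih (fun b hb => h b (List.mem_cons_of_mem _ hb))]

theorem pv_sum_indicator {α : Type} [DecidableEq α] (l : List α) (hnd : l.Nodup) (a : α)
    (ha : a ∈ l) (c : Int) : (l.map (fun k => if k = a then c else 0)).sum = c := by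
  induction l with
  | nil => cases ha
  | cons b t ih =>
    simp only [List.map_cons, List.sum_cons]
    by_cases hb : b = a
    · subst hb
      have hnt : b ∉ t := (List.nodup_cons.mp hnd).1
      have hz : (t.map (fun k => if k = b then c else 0)).sum = 0 :=
        pv_sum_zero _ _ (fun k hk => if_neg (fun h : k = b => hnt (h ▸ hk)))
      simp [hz]
    · have hat : a ∈ t := by
        rcases List.mem_cons.mp ha with h | h
        · exact absurd h.symm hb
        · exact h
      rw [if_neg hb, ih (List.nodup_cons.mp hnd).2 hat, zero_add]

theorem pv_sum_indicator_fn {α : Type} [DecidableEq α] (l : List α) (hnd : l.Nodup) (a : α)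
    (ha : a ∈ l) (f : α → Int) : (l.map (fun k => if a = k then f k else 0)).sum = f a := by
  have heq : (l.map (fun k => if a = k then f k else 0)) =
      (l.map (fun k => if k = a then f a else 0)) := by
    apply List.map_congr_left
    intro k _
    by_cases h : k = a
    · rw [if_pos h, if_pos h.symm, h]
    · rw [if_neg h, if_neg (fun hh => h hh.symm)]
  rw [heq, pv_sum_indicator l hnd a ha (f a)]

theorem pv_filter_beq_single (l : List String) (hnd : l.Nodup) (x : String) :
    l.filter (fun j => j == x) = if x ∈ l then [x] else [] := by
  induction l with
  | nil => simp
  | cons b t ih =>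
    have ht := ih (List.nodup_cons.mp hnd).2
    by_cases hb : b = x
    · subst hb
      have hnt : b ∉ t := (List.nodup_cons.mp hnd).1
      have hz : t.filter (fun j => j == b) = [] := by
        rw [List.filter_eq_nil_iff]
        intro a hat
        simp only [beq_iff_eq]
        exact fun h : a = b => hnt (h ▸ hat)
      simp [hz]
    · rw [List.filter_cons, if_neg (by simp [hb]), ht]
      by_cases hx : x ∈ t
      · rw [if_pos hx, if_pos (List.mem_cons_of_mem _ hx)]
      · rw [if_neg hx, if_neg (fun h => by
          rcases List.mem_cons.mp h with h' | h'
          · exact hb h'.symm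
          · exact hx h')]
theorem pv_sum_col (friends : List String) (x : String) (gs : List String)
    (hg : ∀ g ∈ gs, pvTok1 g ∈ friends ∧ pvTok0 g ≠ pvTok1 g) :
    ((pvDs friends).map (fun k => if k = x then 0 else (pvCnt gs k x : Int))).sum =
      (pvGiv gs x : Int) := by
  induction gs with
  | nil =>
    simp only [pvCnt, pvGiv, List.countP_nil, Nat.cast_zero]
    exact pv_sum_zero _ _ (fun k _ => by split <;> simp)
  | cons g t ih =>
    have hgt : ∀ g' ∈ t, pvTok1 g' ∈ friends ∧ pvTok0 g' ≠ pvTok1 g' :=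
      fun g' h => hg g' (List.mem_cons_of_mem _ h)
    have hmap : ((pvDs friends).map (fun k => if k = x then 0 else (pvCnt (g :: t) k x : Int))) =
        ((pvDs friends).map (fun k =>
          (if k = x then 0 else (pvCnt t k x : Int)) +
          (if k = x then 0 else (if k = pvTok1 g ∧ x = pvTok0 g then 1 else 0)))) := by
      apply List.map_congr_left
      intro k _
      by_cases hk : k = x
      · rw [if_pos hk, if_pos hk, if_pos hk, add_zero]
      · rw [if_neg hk, if_neg hk, if_neg hk, pv_cnt_cons]
    rw [hmap, PySem.List.sum_map_add_int, ih hgt]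
    have hgiv : (pvGiv (g :: t) x : Int) =
        (pvGiv t x : Int) + (if pvTok0 g = x then 1 else 0) := by
      simp only [pvGiv, List.countP_cons]
      by_cases h : pvTok0 g = x <;> simp [h]
    rw [hgiv]
    have hsec : ((pvDs friends).map (fun k =>
        if k = x then (0 : Int) else (if k = pvTok1 g ∧ x = pvTok0 g then 1 else 0))).sum =
        (if pvTok0 g = x then (1 : Int) else 0) := by
      by_cases h0 : pvTok0 g = x
      · have hne : pvTok1 g ≠ x := fun h => (hg g List.mem_cons_self).2 (h0.trans h.symm)
        have heq : ((pvDs friends).map (fun k =>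
            if k = x then 0 else (if k = pvTok1 g ∧ x = pvTok0 g then 1 else 0))) =
            ((pvDs friends).map (fun k => if k = pvTok1 g then (1 : Int) else 0)) := by
          apply List.map_congr_left
          intro k _
          by_cases hk : k = x
          · rw [if_pos hk, if_neg (fun hkk : k = pvTok1 g => hne (hkk.symm.trans hk))]
          · rw [if_neg hk]
            by_cases hk2 : k = pvTok1 g
            · rw [if_pos ⟨hk2, h0.symm⟩, if_pos hk2]
            · rw [if_neg (fun hc => hk2 hc.1), if_neg hk2]
        exact (congrArg List.sum heq).trans ((pv_sum_indicator _ (pv_ds_nodup friends) _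
          ((PySem.Set.mem_ofList friends _).mpr (hg g List.mem_cons_self).1) 1).trans
          (if_pos h0).symm)
      · have heq : ((pvDs friends).map (fun k =>
            if k = x then 0 else (if k = pvTok1 g ∧ x = pvTok0 g then 1 else 0))) =
            ((pvDs friends).map (fun _ => (0 : Int))) := by
          apply List.map_congr_left
          intro k _
          by_cases hk : k = x
          · rw [if_pos hk]
          · rw [if_neg hk, if_neg (fun hc => h0 hc.2.symm)]
        refine (congrArg List.sum heq).trans ?_
        rw [if_neg h0]
        exact pv_sum_zero _ _ (fun _ _ => rfl)
    exact congrArg (fun z => (pvGiv t x : Int) + z) hsec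

theorem pv_sum_row (friends : List String) (x : String) (gs : List String)
    (hg : ∀ g ∈ gs, pvTok0 g ∈ friends ∧ pvTok0 g ≠ pvTok1 g) :
    (((pvDs friends).filter (fun y => decide (x ≠ y))).map
        (fun j => (pvCnt gs x j : Int))).sum = (pvRec gs x : Int) := by
  induction gs with
  | nil =>
    simp only [pvCnt, pvRec, List.countP_nil, Nat.cast_zero]
    exact pv_sum_zero _ _ (fun k _ => rfl)
  | cons g t ih =>
    have hgt : ∀ g' ∈ t, pvTok0 g' ∈ friends ∧ pvTok0 g' ≠ pvTok1 g' :=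
      fun g' h => hg g' (List.mem_cons_of_mem _ h)
    have hmap : (((pvDs friends).filter (fun y => decide (x ≠ y))).map
        (fun j => (pvCnt (g :: t) x j : Int))) =
        (((pvDs friends).filter (fun y => decide (x ≠ y))).map
          (fun j => (pvCnt t x j : Int) + (if x = pvTok1 g ∧ j = pvTok0 g then 1 else 0))) :=
      List.map_congr_left (fun j _ => pv_cnt_cons g t x j)
    rw [hmap, PySem.List.sum_map_add_int, ih hgt]
    have hrec : (pvRec (g :: t) x : Int) =
        (pvRec t x : Int) + (if pvTok1 g = x then 1 else 0) := by
      simp only [pvRec, List.countP_cons]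
      by_cases h : pvTok1 g = x <;> simp [h]
    rw [hrec]
    have hsec : ((((pvDs friends).filter (fun y => decide (x ≠ y))).map
        (fun j => if x = pvTok1 g ∧ j = pvTok0 g then (1 : Int) else 0)).sum) =
        (if pvTok1 g = x then (1 : Int) else 0) := by
      by_cases h1 : pvTok1 g = x
      · have hmem : pvTok0 g ∈ (pvDs friends).filter (fun y => decide (x ≠ y)) := by
          rw [List.mem_filter]
          refine ⟨(PySem.Set.mem_ofList friends _).mpr (hg g List.mem_cons_self).1, ?_⟩
          simp only [decide_eq_true_eq]
          exact fun h => (hg g List.mem_cons_self).2 (h.symm.trans h1.symm)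
        have heq : ((((pvDs friends).filter (fun y => decide (x ≠ y))).map
            (fun j => if x = pvTok1 g ∧ j = pvTok0 g then (1 : Int) else 0))) =
            ((((pvDs friends).filter (fun y => decide (x ≠ y))).map
              (fun j => if j = pvTok0 g then (1 : Int) else 0))) :=
          List.map_congr_left (fun j _ => by
            by_cases hj : j = pvTok0 g
            · rw [if_pos ⟨h1.symm, hj⟩, if_pos hj]
            · rw [if_neg (fun hc => hj hc.2), if_neg hj])
        exact (congrArg List.sum heq).trans ((pv_sum_indicator _
          ((pv_ds_nodup friends).filter _) _ hmem 1).trans (if_pos h1).symm)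
      · have heq : ((((pvDs friends).filter (fun y => decide (x ≠ y))).map
            (fun j => if x = pvTok1 g ∧ j = pvTok0 g then (1 : Int) else 0))) =
            ((((pvDs friends).filter (fun y => decide (x ≠ y))).map (fun _ => (0 : Int)))) :=
          List.map_congr_left (fun j _ => if_neg (fun hc => h1 hc.1.symm))
        refine (congrArg List.sum heq).trans ?_
        rw [if_neg h1]
        exact pv_sum_zero _ _ (fun _ _ => rfl)
    exact congrArg (fun z => (pvRec t x : Int) + z) hsec

theorem pv_rgl0_getD (friends gifts : List String)
    (hg : ∀ g ∈ gifts, pvTok0 g ∈ friends ∧ pvTok1 g ∈ friends ∧ pvTok0 g ≠ pvTok1 g)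
    (x : String) :
    (pvRgl0 friends gifts).getD x PySem.Dict.empty =
      if x ∈ pvDs friends then pvM0 else PySem.Dict.empty := by
  have h0 : pvRgl0 friends gifts =
      List.foldl (fun (r : PySem.Dict String (PySem.Dict String Int)) k => r.insert k pvM0)
        PySem.Dict.empty ((pvSg friends gifts).items.map Prod.fst) := by
    unfold pvRgl0
    exact (List.foldl_map (f := Prod.fst)
      (g := fun (r : PySem.Dict String (PySem.Dict String Int)) k => r.insert k pvM0)).symm
  have hkeys : (pvSg friends gifts).items.map Prod.fst = pvDs friends := by
    rw [← pv_sg_keys friends gifts hg]; rfl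
  rw [h0, hkeys, pv_getD_foldl_insert_fun (v := fun _ => pvM0)]
  split <;> simp

theorem pv_rgl0_keys (friends gifts : List String)
    (hg : ∀ g ∈ gifts, pvTok0 g ∈ friends ∧ pvTok1 g ∈ friends ∧ pvTok0 g ≠ pvTok1 g) :
    (pvRgl0 friends gifts).keys = pvDs friends := by
  have h0 : pvRgl0 friends gifts =
      List.foldl (fun (r : PySem.Dict String (PySem.Dict String Int)) k => r.insert k pvM0)
        PySem.Dict.empty ((pvSg friends gifts).items.map Prod.fst) := by
    unfold pvRgl0
    exact (List.foldl_map (f := Prod.fst)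
      (g := fun (r : PySem.Dict String (PySem.Dict String Int)) k => r.insert k pvM0)).symm
  have hkeys : (pvSg friends gifts).items.map Prod.fst = pvDs friends := by
    rw [← pv_sg_keys friends gifts hg]; rfl
  rw [h0, hkeys]
  have h1 : (List.foldl (fun (r : PySem.Dict String (PySem.Dict String Int)) k =>
      r.insert k pvM0) PySem.Dict.empty (pvDs friends)).keys =
      PySem.Set.update (PySem.Dict.empty :
        PySem.Dict String (PySem.Dict String Int)).keys (pvDs friends) :=
    PySem.Dict.keys_foldl_insert _ (fun _ _ => pvM0) _
  rw [h1, PySem.Dict.keys_empty]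
  exact (PySem.Set.update_empty _).trans (PySem.Set.ofList_eq_self_of_nodup _ (pv_ds_nodup friends))

theorem pv_mem_ds_of_mem_items (friends gifts : List String)
    (hg : ∀ g ∈ gifts, pvTok0 g ∈ friends ∧ pvTok1 g ∈ friends ∧ pvTok0 g ≠ pvTok1 g)
    (p : String × PySem.Dict String Int) (hp : p ∈ (pvSg friends gifts).items) :
    p.1 ∈ pvDs friends := by
  rw [pv_sg_items friends gifts hg] at hp
  obtain ⟨k, hk, hkp⟩ := List.mem_map.mp hp
  rw [← hkp]
  exact hk

theorem pv_mem_ds_of_mem_row (friends gifts : List String)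
    (hg : ∀ g ∈ gifts, pvTok0 g ∈ friends ∧ pvTok1 g ∈ friends ∧ pvTok0 g ≠ pvTok1 g)
    (p : String × PySem.Dict String Int) (hp : p ∈ (pvSg friends gifts).items)
    (q : String × Int) (hq : q ∈ p.2.items) : q.1 ∈ pvDs friends := by
  have hrow : p.2 = (pvSg friends gifts).getD p.1 PySem.Dict.empty := by
    rw [pv_sg_items friends gifts hg] at hp
    obtain ⟨k, hk, hkp⟩ := List.mem_map.mp hp
    rw [← hkp]
  rw [hrow, pv_row_items friends gifts hg p.1] at hq
  obtain ⟨j, hj, hjq⟩ := List.mem_map.mp hq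
  have : q.1 = j := by rw [← hjq]
  rw [this, pvKI] at *
  revert hj
  split
  · intro hj
    exact (List.mem_filter.mp hj).1
  · intro hj
    cases hj

theorem pv_rgl1_keys (friends gifts : List String)
    (hg : ∀ g ∈ gifts, pvTok0 g ∈ friends ∧ pvTok1 g ∈ friends ∧ pvTok0 g ≠ pvTok1 g) :
    (pvRgl1 friends gifts).keys = pvDs friends := by
  unfold pvRgl1
  rw [pv_outer_keys _ _ ?h1 ?h2, pv_rgl0_keys friends gifts hg]
  case h1 =>
    intro p hp
    rw [pv_rgl0_keys friends gifts hg]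
    exact pv_mem_ds_of_mem_items friends gifts hg p hp
  case h2 =>
    intro p hp q hq
    rw [pv_rgl0_keys friends gifts hg]
    exact pv_mem_ds_of_mem_row friends gifts hg p hp q hq

theorem pv_rgl1_send_val (friends gifts : List String)
    (hg : ∀ g ∈ gifts, pvTok0 g ∈ friends ∧ pvTok1 g ∈ friends ∧ pvTok0 g ≠ pvTok1 g)
    (x : String) (hx : x ∈ pvDs friends) :
    ((pvRgl1 friends gifts).getD x PySem.Dict.empty).getD "send_gift_count" 0 =
      (pvGiv gifts x : Int) := by
  unfold pvRgl1
  rw [pv_outer_send, pv_rgl0_getD friends gifts hg, if_pos hx]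
  have hm : pvM0.getD "send_gift_count" 0 = 0 := by rfl
  rw [hm, zero_add, pv_sg_items friends gifts hg, List.map_map]
  have hx' : x ∈ friends := (PySem.Set.mem_ofList friends x).mp hx
  refine (congrArg List.sum (List.map_congr_left ?_)).trans
    (pv_sum_col friends x gifts (fun g h => ⟨(hg g h).2.1, (hg g h).2.2⟩))
  intro k hk
  simp only [Function.comp_apply]
  have hk' : k ∈ friends := (PySem.Set.mem_ofList friends k).mp hk
  rw [pv_row_items friends gifts hg k, List.filter_map, List.map_map]
  have hfil : (pvKI friends k).filter
      ((fun q => q.1 == x) ∘ (fun j => (j, (pvCnt gifts k j : Int)))) =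
      (pvKI friends k).filter (fun j => j == x) := by
    apply List.filter_congr
    intro j _
    rfl
  rw [hfil, pv_filter_beq_single _ (pv_KI_nodup friends k) x]
  by_cases hkx : k = x
  · rw [if_pos hkx, if_neg]
    · rfl
    · rw [pv_mem_KI friends k x hk']
      exact fun hc => hc.2 hkx
  · rw [if_neg hkx, if_pos ((pv_mem_KI friends k x hk').mpr ⟨hx, hkx⟩)]
    simp

theorem pv_rgl1_in_val (friends gifts : List String)
    (hg : ∀ g ∈ gifts, pvTok0 g ∈ friends ∧ pvTok1 g ∈ friends ∧ pvTok0 g ≠ pvTok1 g)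
    (x : String) (hx : x ∈ pvDs friends) :
    ((pvRgl1 friends gifts).getD x PySem.Dict.empty).getD "in_gift_count" 0 =
      (pvRec gifts x : Int) := by
  unfold pvRgl1
  rw [pv_outer_in, pv_rgl0_getD friends gifts hg, if_pos hx]
  have hm : pvM0.getD "in_gift_count" 0 = 0 := by rfl
  rw [hm, zero_add, pv_sg_items friends gifts hg, List.map_map]
  have hx' : x ∈ friends := (PySem.Set.mem_ofList friends x).mp hx
  have hfn : ((pvDs friends).map ((fun p => if x = p.1 then (p.2.items.map (·.2)).sum else 0) ∘
      (fun k => (k, (pvSg friends gifts).getD k PySem.Dict.empty)))) =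
      ((pvDs friends).map (fun k => if x = k then
        ((((pvSg friends gifts).getD k PySem.Dict.empty).items.map (·.2)).sum) else 0)) := by
    apply List.map_congr_left
    intro k _
    rfl
  rw [hfn, pv_sum_indicator_fn _ (pv_ds_nodup friends) x hx]
  rw [pv_row_items friends gifts hg x, List.map_map]
  rw [pvKI, if_pos hx']
  exact pv_sum_row friends x gifts (fun g h => ⟨(hg g h).1, (hg g h).2.2⟩)

theorem pv_getD_foldl_modify_once {ν μ : Type} (l : List (String × μ)) (g : ν → ν) (e : ν)
    (hnd : (l.map Prod.fst).Nodup) :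
    ∀ (r : PySem.Dict String ν) (x : String),
      (l.foldl (fun r p => r.modify p.1 e g) r).getD x e =
        if x ∈ l.map Prod.fst then g (r.getD x e) else r.getD x e := by
  induction l with
  | nil => intro r x; simp
  | cons p t ih =>
    intro r x
    simp only [List.foldl_cons, List.map_cons]
    rw [ih ((List.nodup_cons.mp hnd).2)]
    by_cases hxp : x = p.1
    · have hnt : x ∉ t.map Prod.fst := by
        rw [hxp]; exact (List.nodup_cons.mp hnd).1
      rw [if_neg hnt, if_pos (List.mem_cons.mpr (Or.inl hxp)), hxp,
        PySem.Dict.getD_modify_self]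
    · rw [PySem.Dict.getD_modify_of_ne _ _ _ hxp]
      by_cases hxt : x ∈ t.map Prod.fst
      · rw [if_pos hxt, if_pos (List.mem_cons.mpr (Or.inr hxt))]
      · rw [if_neg hxt, if_neg (fun h => by
          rcases List.mem_cons.mp h with h' | h'
          · exact hxp h'
          · exact hxt h')]

theorem pv_fut_val (friends gifts : List String)
    (hg : ∀ g ∈ gifts, pvTok0 g ∈ friends ∧ pvTok1 g ∈ friends ∧ pvTok0 g ≠ pvTok1 g)
    (x : String) (hx : x ∈ pvDs friends) :
    ((pvRgl friends gifts).getD x PySem.Dict.empty).getD "gift_futures_count" 0 =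
      pvFut gifts x := by
  have hmapkeys : (pvRgl1 friends gifts).items.map Prod.fst = pvDs friends := by
    rw [← pv_rgl1_keys friends gifts hg]; rfl
  have hnd : ((pvRgl1 friends gifts).items.map Prod.fst).Nodup := by
    rw [hmapkeys]; exact pv_ds_nodup friends
  have h := pv_getD_foldl_modify_once (pvRgl1 friends gifts).items
    (fun m => m.insert "gift_futures_count"
      (m.getD "send_gift_count" 0 - m.getD "in_gift_count" 0)) PySem.Dict.empty hnd
    (pvRgl1 friends gifts) x
  have hrgl : (pvRgl friends gifts).getD x PySem.Dict.empty =
      if x ∈ (pvRgl1 friends gifts).items.map Prod.fst then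
        ((pvRgl1 friends gifts).getD x PySem.Dict.empty).insert "gift_futures_count"
          (((pvRgl1 friends gifts).getD x PySem.Dict.empty).getD "send_gift_count" 0 -
            ((pvRgl1 friends gifts).getD x PySem.Dict.empty).getD "in_gift_count" 0)
      else (pvRgl1 friends gifts).getD x PySem.Dict.empty := h
  rw [hrgl, hmapkeys, if_pos hx, PySem.Dict.getD_insert_self,
    pv_rgl1_send_val friends gifts hg x hx, pv_rgl1_in_val friends gifts hg x hx]
  rfl
-- the result-counting loop
theorem pv_count_fold (c1 c2 c3 : String → Prop) [DecidablePred c1] [DecidablePred c2]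
    [DecidablePred c3] (my : String) (l : List (String × Int)) :
    ∀ (r : PySem.Dict String Int) (x : String),
      (l.foldl (fun r q =>
        if c1 q.1 then r.modify my 0 (· + 1)
        else if c2 q.1 then (if c3 q.1 then r.modify my 0 (· + 1) else r) else r) r).getD x 0 =
      r.getD x 0 + (if x = my then
        (l.countP (fun q => decide (c1 q.1) || (decide (c2 q.1) && decide (c3 q.1))) : Int)
      else 0) := by
  induction l with
  | nil => intro r x; simp
  | cons q t ih =>
    intro r x
    simp only [List.foldl_cons, List.countP_cons]
    rw [ih]
    have hstep : (if c1 q.1 then r.modify my 0 (· + 1)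
        else if c2 q.1 then (if c3 q.1 then r.modify my 0 (· + 1) else r) else r).getD x 0 =
        r.getD x 0 + (if x = my ∧
          (decide (c1 q.1) || (decide (c2 q.1) && decide (c3 q.1))) = true then 1 else 0) := by
      by_cases h1 : c1 q.1
      · rw [if_pos h1, PySem.Dict.getD_modify]
        by_cases hx : x = my <;> simp [hx, h1]
      · rw [if_neg h1]
        by_cases h2 : c2 q.1
        · rw [if_pos h2]
          by_cases h3 : c3 q.1
          · rw [if_pos h3, PySem.Dict.getD_modify]
            by_cases hx : x = my <;> simp [hx, h1, h2, h3]
          · rw [if_neg h3]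
            by_cases hx : x = my <;> simp [hx, h1, h2, h3]
        · rw [if_neg h2]
          by_cases hx : x = my <;> simp [hx, h1, h2]
    rw [hstep]
    by_cases hx : x = my <;>
      by_cases hc : (decide (c1 q.1) || (decide (c2 q.1) && decide (c3 q.1))) = true <;>
      simp [hx, hc] <;> omega

theorem pv_count_fold_keys (c1 c2 c3 : String → Prop) [DecidablePred c1] [DecidablePred c2]
    [DecidablePred c3] (my : String) (l : List (String × Int)) :
    ∀ (r : PySem.Dict String Int), my ∈ r.keys →
      (l.foldl (fun r q =>
        if c1 q.1 then r.modify my 0 (· + 1)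
        else if c2 q.1 then (if c3 q.1 then r.modify my 0 (· + 1) else r) else r) r).keys =
      r.keys := by
  induction l with
  | nil => intro r _; rfl
  | cons q t ih =>
    intro r hmy
    simp only [List.foldl_cons]
    have hmod : (r.modify my 0 (· + 1)).keys = r.keys := by
      rw [PySem.Dict.keys_modify, PySem.Dict.keys_insert_of_contains _ _
        ((PySem.Dict.contains_iff_mem_keys _ _).mpr hmy)]
    have hstep : (if c1 q.1 then r.modify my 0 (· + 1)
        else if c2 q.1 then (if c3 q.1 then r.modify my 0 (· + 1) else r) else r).keys =
        r.keys := by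
      split_ifs <;> first | exact hmod | rfl
    rw [ih _ (hstep ▸ hmy), hstep]

theorem pv_res_outer (c1 c2 c3 : String → String → Prop) [∀ a b, Decidable (c1 a b)]
    [∀ a b, Decidable (c2 a b)] [∀ a b, Decidable (c3 a b)]
    (L : List (String × PySem.Dict String Int)) :
    ∀ (r : PySem.Dict String Int) (x : String),
      (L.foldl (fun r p => p.2.items.foldl (fun r q =>
        if c1 p.1 q.1 then r.modify p.1 0 (· + 1)
        else if c2 p.1 q.1 then (if c3 p.1 q.1 then r.modify p.1 0 (· + 1) else r) else r) r)
          r).getD x 0 =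
      r.getD x 0 + (L.map (fun p => if x = p.1 then
        (p.2.items.countP (fun q =>
          decide (c1 p.1 q.1) || (decide (c2 p.1 q.1) && decide (c3 p.1 q.1))) : Int)
      else 0)).sum := by
  induction L with
  | nil => intro r x; simp
  | cons p t ih =>
    intro r x
    simp only [List.foldl_cons, List.map_cons, List.sum_cons]
    rw [ih, pv_count_fold (c1 p.1) (c2 p.1) (c3 p.1) p.1 p.2.items]
    omega

theorem pv_res_outer_keys (c1 c2 c3 : String → String → Prop) [∀ a b, Decidable (c1 a b)]
    [∀ a b, Decidable (c2 a b)] [∀ a b, Decidable (c3 a b)]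
    (L : List (String × PySem.Dict String Int)) :
    ∀ (r : PySem.Dict String Int), (∀ p ∈ L, p.1 ∈ r.keys) →
      (L.foldl (fun r p => p.2.items.foldl (fun r q =>
        if c1 p.1 q.1 then r.modify p.1 0 (· + 1)
        else if c2 p.1 q.1 then (if c3 p.1 q.1 then r.modify p.1 0 (· + 1) else r) else r) r)
          r).keys = r.keys := by
  induction L with
  | nil => intro r _; rfl
  | cons p t ih =>
    intro r h1
    simp only [List.foldl_cons]
    have hk : (p.2.items.foldl (fun r q =>
        if c1 p.1 q.1 then r.modify p.1 0 (· + 1)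
        else if c2 p.1 q.1 then (if c3 p.1 q.1 then r.modify p.1 0 (· + 1) else r) else r)
          r).keys = r.keys :=
      pv_count_fold_keys (c1 p.1) (c2 p.1) (c3 p.1) p.1 p.2.items r
        (h1 p List.mem_cons_self)
    rw [ih _ (fun p' hp' => hk ▸ h1 p' (List.mem_cons_of_mem _ hp')), hk]

def pvCondA (friends gifts : List String) (a b : String) : Bool :=
  decide (((pvSg friends gifts).getD a PySem.Dict.empty).getD b 0 <
      ((pvSg friends gifts).getD b PySem.Dict.empty).getD a 0) ||
    (decide (((pvSg friends gifts).getD a PySem.Dict.empty).getD b 0 =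
        ((pvSg friends gifts).getD b PySem.Dict.empty).getD a 0) &&
      decide (((pvRgl friends gifts).getD a PySem.Dict.empty).getD "gift_futures_count" 0 >
        ((pvRgl friends gifts).getD b PySem.Dict.empty).getD "gift_futures_count" 0))

theorem pv_res_getD (friends gifts : List String) (x : String) :
    (pvRes friends gifts).getD x 0 =
      (pvRes0 friends gifts).getD x 0 + ((pvSg friends gifts).items.map (fun p =>
        if x = p.1 then (p.2.items.countP (fun q => pvCondA friends gifts p.1 q.1) : Int)
        else 0)).sum := by
  unfold pvRes
  exact pv_res_outer
    (fun a b => ((pvSg friends gifts).getD a PySem.Dict.empty).getD b 0 <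
      ((pvSg friends gifts).getD b PySem.Dict.empty).getD a 0)
    (fun a b => ((pvSg friends gifts).getD a PySem.Dict.empty).getD b 0 =
      ((pvSg friends gifts).getD b PySem.Dict.empty).getD a 0)
    (fun a b => ((pvRgl friends gifts).getD a PySem.Dict.empty).getD "gift_futures_count" 0 >
      ((pvRgl friends gifts).getD b PySem.Dict.empty).getD "gift_futures_count" 0)
    (pvSg friends gifts).items (pvRes0 friends gifts) x

theorem pv_condA_eq (friends gifts : List String)
    (hg : ∀ g ∈ gifts, pvTok0 g ∈ friends ∧ pvTok1 g ∈ friends ∧ pvTok0 g ≠ pvTok1 g)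
    (x y : String) (hx : x ∈ pvDs friends) (hy : y ∈ pvDs friends) :
    pvCondA friends gifts x y = pvCond gifts x y := by
  unfold pvCondA pvCond
  rw [pv_sg_cell friends gifts x y, pv_sg_cell friends gifts y x,
    pv_fut_val friends gifts hg x hx, pv_fut_val friends gifts hg y hy]

theorem pv_res0_getD (friends gifts : List String) (x : String) :
    (pvRes0 friends gifts).getD x 0 = 0 := by
  unfold pvRes0
  rw [pv_getD_foldl_insert_fun (v := fun _ => (0 : Int))]
  split <;> simp

theorem pv_res0_keys (friends gifts : List String)
    (hg : ∀ g ∈ gifts, pvTok0 g ∈ friends ∧ pvTok1 g ∈ friends ∧ pvTok0 g ≠ pvTok1 g) :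
    (pvRes0 friends gifts).keys = pvDs friends := by
  unfold pvRes0
  have h1 : (List.foldl (fun (r : PySem.Dict String Int) n => r.insert n 0)
      PySem.Dict.empty (pvSg friends gifts).keys).keys =
      PySem.Set.update (PySem.Dict.empty : PySem.Dict String Int).keys
        (pvSg friends gifts).keys :=
    PySem.Dict.keys_foldl_insert _ (fun _ _ => (0 : Int)) _
  rw [h1, PySem.Dict.keys_empty, pv_sg_keys friends gifts hg]
  exact (PySem.Set.update_empty _).trans (PySem.Set.ofList_eq_self_of_nodup _ (pv_ds_nodup friends))

theorem pv_res_keys (friends gifts : List String)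
    (hg : ∀ g ∈ gifts, pvTok0 g ∈ friends ∧ pvTok1 g ∈ friends ∧ pvTok0 g ≠ pvTok1 g) :
    (pvRes friends gifts).keys = pvDs friends := by
  have h : (pvRes friends gifts).keys = (pvRes0 friends gifts).keys := by
    unfold pvRes
    exact pv_res_outer_keys
      (fun a b => ((pvSg friends gifts).getD a PySem.Dict.empty).getD b 0 <
        ((pvSg friends gifts).getD b PySem.Dict.empty).getD a 0)
      (fun a b => ((pvSg friends gifts).getD a PySem.Dict.empty).getD b 0 =
        ((pvSg friends gifts).getD b PySem.Dict.empty).getD a 0)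
      (fun a b => ((pvRgl friends gifts).getD a PySem.Dict.empty).getD "gift_futures_count" 0 >
        ((pvRgl friends gifts).getD b PySem.Dict.empty).getD "gift_futures_count" 0)
      (pvSg friends gifts).items (pvRes0 friends gifts)
      (fun p hp => by
        rw [pv_res0_keys friends gifts hg]
        exact pv_mem_ds_of_mem_items friends gifts hg p hp)
  rw [h, pv_res0_keys friends gifts hg]

theorem pv_res_val (friends gifts : List String)
    (hg : ∀ g ∈ gifts, pvTok0 g ∈ friends ∧ pvTok1 g ∈ friends ∧ pvTok0 g ≠ pvTok1 g)
    (x : String) (hx : x ∈ pvDs friends) :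
    (pvRes friends gifts).getD x 0 = pvScore friends gifts x := by
  rw [pv_res_getD, pv_res0_getD, zero_add, pv_sg_items friends gifts hg, List.map_map]
  have hx' : x ∈ friends := (PySem.Set.mem_ofList friends x).mp hx
  have hfn : ((pvDs friends).map ((fun p => if x = p.1 then
      ((p.2.items.countP (fun q => pvCondA friends gifts p.1 q.1)) : Int) else 0) ∘
      (fun k => (k, (pvSg friends gifts).getD k PySem.Dict.empty)))) =
      ((pvDs friends).map (fun k => if x = k then
        ((((pvSg friends gifts).getD k PySem.Dict.empty).items.countP
          (fun q => pvCondA friends gifts k q.1)) : Int) else 0)) := by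
    apply List.map_congr_left
    intro k _
    rfl
  rw [hfn, pv_sum_indicator_fn _ (pv_ds_nodup friends) x hx]
  rw [pv_row_items friends gifts hg x, List.countP_map]
  have hcp : (pvKI friends x).countP
      ((fun q => pvCondA friends gifts x q.1) ∘ (fun j => (j, (pvCnt gifts x j : Int)))) =
      (pvKI friends x).countP (pvCond gifts x) := by
    apply List.countP_congr
    intro j hj
    have hj' : j ∈ pvDs friends := ((pv_mem_KI friends x j hx').mp hj).1
    simp only [Function.comp_apply]
    rw [pv_condA_eq friends gifts hg x j hx hj']
  rw [hcp, pvScore, pvKI, if_pos hx']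

theorem pv_score_nonneg (friends gifts : List String) (x : String) :
    0 ≤ pvScore friends gifts x := by
  unfold pvScore
  exact Int.natCast_nonneg _

theorem pv_solution_eq (friends gifts : List String)
    (hg : ∀ g ∈ gifts, pvTok0 g ∈ friends ∧ pvTok1 g ∈ friends ∧ pvTok0 g ≠ pvTok1 g)
    (hne : friends ≠ []) : solution friends gifts = pvAnswer friends gifts := by
  rw [pv_solution_pipeline, PySem.List.foldl_append_singleton_eq_self, List.nil_append]
  have hkeys : (pvRes friends gifts).keys = pvDs friends := pv_res_keys friends gifts hg
  have hvals : (pvRes friends gifts).values =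
      (pvDs friends).map (pvScore friends gifts) := by
    rw [PySem.Dict.values_eq_map_keys _ (by rw [hkeys]; exact pv_ds_nodup friends) 0, hkeys]
    exact List.map_congr_left (fun k hk => pv_res_val friends gifts hg k hk)
  rw [hvals]
  have hds : pvDs friends ≠ [] := by
    cases friends with
    | nil => exact absurd rfl hne
    | cons f t =>
      intro h
      have : f ∈ pvDs (f :: t) := (PySem.Set.mem_ofList _ f).mpr List.mem_cons_self
      rw [h] at this
      cases this
  obtain ⟨a, t, hat⟩ := List.exists_cons_of_ne_nil hds
  rw [pvAnswer, hat, List.map_cons, PySem.List.max?_id_cons, List.foldl_cons,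
    max_eq_right (pv_score_nonneg friends gifts a)]

theorem pv_keyfold_getD {κ : Type} [BEq κ] [LawfulBEq κ] [DecidableEq κ]
    (l : List String) (k : String → κ) :
    ∀ (d : PySem.Dict κ Int) (v : κ),
      (l.foldl (fun d g => d.insert (k g) (d.getD (k g) 0 + 1)) d).getD v 0 =
        d.getD v 0 + (l.countP (fun g => k g == v) : Int) := by
  induction l with
  | nil => intro d v; simp
  | cons g t ih =>
    intro d v
    simp only [List.foldl_cons, List.countP_cons]
    rw [ih, PySem.Dict.getD_insert]
    by_cases hv : v = k g
    · have hb : (k g == v) = true := beq_iff_eq.mpr hv.symm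
      rw [if_pos hv, hb, hv, if_pos rfl]
      push_cast
      ring
    · have hb : (k g == v) = false := beq_eq_false_iff_ne.mpr (fun h => hv h.symm)
      rw [if_neg hv, hb, if_neg (by simp : ¬(false = true))]
      push_cast
      ring
-- ===== B-side: baseline over gift-index multiplicities + sparse corrections =====

def pvPairStep (d : PySem.Dict (String × String) Int) (g : String) :
    PySem.Dict (String × String) Int :=
  d.insert (pvTok0 g, pvTok1 g) (d.getD (pvTok0 g, pvTok1 g) 0 + 1)
def pvIdxStep (d : PySem.Dict String Int) (g : String) : PySem.Dict String Int :=
  let d1 := d.insert (pvTok0 g) (d.getD (pvTok0 g) 0 + 1)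
  d1.insert (pvTok1 g) (d1.getD (pvTok1 g) 0 - 1)
def pvPairD (gifts : List String) : PySem.Dict (String × String) Int :=
  gifts.foldl pvPairStep PySem.Dict.empty
def pvIdxD (gifts : List String) : PySem.Dict String Int :=
  gifts.foldl pvIdxStep PySem.Dict.empty
def pvMultD (friends gifts : List String) : PySem.Dict Int Int :=
  (pvDs friends).foldl (fun (m : PySem.Dict Int Int) n =>
    m.insert ((pvIdxD gifts).getD n 0) (m.getD ((pvIdxD gifts).getD n 0) 0 + 1))
    PySem.Dict.empty
def pvAdjD (gifts : List String) : PySem.Dict String (PySem.Set String) :=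
  (pvPairD gifts).keys.foldl pvAdjStepB PySem.Dict.empty
def pvAdjA (gifts : List String) (a : String) : PySem.Set String :=
  (pvAdjD gifts).getD a PySem.Set.empty
def pvBScore (friends gifts : List String) (a : String) : Int :=
  let ia := (pvIdxD gifts).getD a 0
  let s := (pvMultD friends gifts).items.foldl
    (fun s q => if q.1 < ia then s + q.2 else s) (0 : Int)
  (pvAdjA gifts a).foldl (fun s b =>
      let gave := (pvPairD gifts).getD (a, b) 0
      let got := (pvPairD gifts).getD (b, a) 0
      let ib := (pvIdxD gifts).getD b 0
      let actual : Int := if gave > got ∨ (gave = got ∧ ia > ib) then 1 else 0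
      let base : Int := if ia > ib then 1 else 0
      s + (actual - base)) s
def pvH (gifts : List String) (a b : String) : Int :=
  (if pvCond gifts a b then 1 else 0) -
    (if pvFut gifts b < pvFut gifts a then 1 else 0)

theorem pv_foldl_stepB (gs : List String) :
    ∀ (s : PySem.Dict (String × String) Int × PySem.Dict String Int),
      gs.foldl pvStepB s = (gs.foldl pvPairStep s.1, gs.foldl pvIdxStep s.2) := by
  induction gs with
  | nil => intro s; rfl
  | cons g t ih =>
    intro s
    simp only [List.foldl_cons]
    rw [ih]
    rfl

theorem pv_alt_pipeline (friends gifts : List String) :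
    solution_alt friends gifts =
      (pvDs friends).foldl (fun best a => max best (pvBScore friends gifts a)) 0 := by
  simp only [solution_alt, pv_foldl_stepB, pvBScore, pvAdjA, pvAdjD, pvMultD, pvPairD,
    pvIdxD, pvDs, PySem.List.dedup_eq_ofList]
  rfl

theorem pv_pairD_getD (gifts : List String) (a b : String) :
    (pvPairD gifts).getD (a, b) 0 = (pvCnt gifts b a : Int) := by
  have h := pv_keyfold_getD gifts (fun g => (pvTok0 g, pvTok1 g)) PySem.Dict.empty (a, b)
  have hsame : pvPairD gifts = gifts.foldl (fun d g =>
      d.insert (pvTok0 g, pvTok1 g) (d.getD (pvTok0 g, pvTok1 g) 0 + 1))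
      PySem.Dict.empty := rfl
  rw [hsame, h, PySem.Dict.getD_empty, zero_add]
  have hc : gifts.countP (fun g => (pvTok0 g, pvTok1 g) == (a, b)) = pvCnt gifts b a := by
    apply List.countP_congr
    intro g _
    simp only [beq_iff_eq, Prod.mk.injEq, Bool.and_eq_true]
    exact ⟨fun ⟨u, v⟩ => ⟨v, u⟩, fun ⟨u, v⟩ => ⟨v, u⟩⟩
  rw [hc]

theorem pv_pairD_keys (gifts : List String) :
    (pvPairD gifts).keys =
      PySem.Set.ofList (gifts.map (fun g => (pvTok0 g, pvTok1 g))) := by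
  have h : (pvPairD gifts).keys =
      PySem.Set.update (PySem.Dict.empty : PySem.Dict (String × String) Int).keys
        (gifts.map (fun g => (pvTok0 g, pvTok1 g))) :=
    PySem.Dict.keys_foldl_insert_key gifts (fun g => (pvTok0 g, pvTok1 g))
      (fun d g => d.getD (pvTok0 g, pvTok1 g) 0 + 1) PySem.Dict.empty
  rw [h, PySem.Dict.keys_empty]
  exact PySem.Set.update_empty _

theorem pv_mem_pair_keys (gifts : List String) (a b : String) :
    (a, b) ∈ (pvPairD gifts).keys ↔ 0 < pvCnt gifts b a := by
  rw [pv_pairD_keys, PySem.Set.mem_ofList, List.mem_map]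
  unfold pvCnt
  rw [List.countP_pos_iff]
  constructor
  · rintro ⟨g, hg, hpair⟩
    refine ⟨g, hg, ?_⟩
    have h0 : pvTok0 g = a := congrArg Prod.fst hpair
    have h1 : pvTok1 g = b := congrArg Prod.snd hpair
    simp [h0, h1]
  · rintro ⟨g, hg, hp⟩
    have h : pvTok1 g = b ∧ pvTok0 g = a := by
      simpa using hp
    exact ⟨g, hg, by rw [h.1, h.2]⟩

theorem pv_idx_step (d : PySem.Dict String Int) (g : String) (x : String) :
    (pvIdxStep d g).getD x 0 =
      d.getD x 0 + (if pvTok0 g = x then 1 else 0) - (if pvTok1 g = x then 1 else 0) := by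
  unfold pvIdxStep
  simp only
  rw [PySem.Dict.getD_insert]
  by_cases h1 : x = pvTok1 g
  · rw [if_pos h1, PySem.Dict.getD_insert]
    subst h1
    by_cases h10 : pvTok1 g = pvTok0 g
    · rw [if_pos h10, if_pos h10.symm, if_pos rfl, h10]
    · rw [if_neg h10, if_neg (fun h => h10 h.symm), if_pos rfl]
      ring
  · rw [if_neg h1, PySem.Dict.getD_insert]
    by_cases h0 : x = pvTok0 g
    · subst h0
      rw [if_pos rfl, if_pos rfl, if_neg (fun h => h1 h.symm)]
      ring
    · rw [if_neg h0, if_neg (fun h => h0 h.symm), if_neg (fun h => h1 h.symm)]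
      ring

theorem pv_giv_cons (g : String) (t : List String) (x : String) :
    (pvGiv (g :: t) x : Int) = (pvGiv t x : Int) + (if pvTok0 g = x then 1 else 0) := by
  simp only [pvGiv, List.countP_cons]
  by_cases h : pvTok0 g = x <;> simp [h]

theorem pv_rec_cons (g : String) (t : List String) (x : String) :
    (pvRec (g :: t) x : Int) = (pvRec t x : Int) + (if pvTok1 g = x then 1 else 0) := by
  simp only [pvRec, List.countP_cons]
  by_cases h : pvTok1 g = x <;> simp [h]

theorem pv_idxD_fold (gs : List String) :
    ∀ (d : PySem.Dict String Int) (x : String),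
      (gs.foldl pvIdxStep d).getD x 0 =
        d.getD x 0 + (pvGiv gs x : Int) - (pvRec gs x : Int) := by
  induction gs with
  | nil => intro d x; simp [pvGiv, pvRec]
  | cons g t ih =>
    intro d x
    simp only [List.foldl_cons]
    rw [ih, pv_idx_step, pv_giv_cons, pv_rec_cons]
    by_cases h0 : pvTok0 g = x <;> by_cases h1 : pvTok1 g = x <;> simp [h0, h1] <;> ring

theorem pv_idxD_fut (gifts : List String) (x : String) :
    (pvIdxD gifts).getD x 0 = pvFut gifts x := by
  unfold pvIdxD pvFut
  rw [pv_idxD_fold]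
  simp

theorem pv_multD_getD (friends gifts : List String) (v : Int) :
    (pvMultD friends gifts).getD v 0 =
      ((pvDs friends).countP (fun n => (pvIdxD gifts).getD n 0 == v) : Int) := by
  unfold pvMultD
  rw [pv_keyfold_getD (pvDs friends) (fun n => (pvIdxD gifts).getD n 0) PySem.Dict.empty v,
    PySem.Dict.getD_empty, zero_add]

theorem pv_multD_keys (friends gifts : List String) :
    (pvMultD friends gifts).keys =
      PySem.Set.ofList ((pvDs friends).map (fun n => (pvIdxD gifts).getD n 0)) := by
  have h : (pvMultD friends gifts).keys =
      PySem.Set.update (PySem.Dict.empty : PySem.Dict Int Int).keys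
        ((pvDs friends).map (fun n => (pvIdxD gifts).getD n 0)) :=
    PySem.Dict.keys_foldl_insert_key (pvDs friends) (fun n => (pvIdxD gifts).getD n 0)
      (fun m n => m.getD ((pvIdxD gifts).getD n 0) 0 + 1) PySem.Dict.empty
  rw [h, PySem.Dict.keys_empty]
  exact PySem.Set.update_empty _

theorem pv_sum_count_values {α : Type} [BEq α] [LawfulBEq α] [DecidableEq α]
    (S : List α) (hS : S.Nodup) (k : String → α) (p : α → Prop) [DecidablePred p] :
    ∀ (l : List String), (∀ n ∈ l, k n ∈ S) →
      (S.map (fun v => if p v then (l.countP (fun n => k n == v) : Int) else 0)).sum =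
        (l.countP (fun n => decide (p (k n))) : Int) := by
  intro l
  induction l with
  | nil =>
    intro _
    simp only [List.countP_nil, Nat.cast_zero]
    exact pv_sum_zero _ _ (fun v _ => by split <;> rfl)
  | cons a t ih =>
    intro hk
    have hmap : S.map (fun v => if p v then ((a :: t).countP (fun n => k n == v) : Int) else 0)
        = S.map (fun v => (if p v then (t.countP (fun n => k n == v) : Int) else 0)
            + (if v = k a then (if p (k a) then (1 : Int) else 0) else 0)) := by
      apply List.map_congr_left
      intro v _
      rw [List.countP_cons]
      by_cases hv : v = k a
      · have hb : (k a == v) = true := beq_iff_eq.mpr hv.symm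
        rw [hb, if_pos hv, ← hv]
        by_cases hp : p v <;> simp [hp]
      · have hb : (k a == v) = false := by
          simp only [beq_eq_false_iff_ne, ne_eq]
          exact fun h => hv h.symm
        rw [hb, if_neg hv]
        by_cases hp : p v <;> simp [hp]
    rw [hmap, PySem.List.sum_map_add_int,
      ih (fun n hn => hk n (List.mem_cons_of_mem _ hn)),
      pv_sum_indicator S hS (k a) (hk a List.mem_cons_self)]
    rw [List.countP_cons]
    by_cases hp : p (k a) <;> simp [hp]

theorem pv_baseline (friends gifts : List String) (ia : Int) :
    (pvMultD friends gifts).items.foldl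
        (fun s q => if q.1 < ia then s + q.2 else s) (0 : Int) =
      ((pvDs friends).countP (fun n => decide (pvFut gifts n < ia)) : Int) := by
  have hnd : (pvMultD friends gifts).keys.Nodup := by
    rw [pv_multD_keys]
    exact PySem.Set.nodup_ofList _
  have hcongr : (pvMultD friends gifts).items.foldl
      (fun s q => if q.1 < ia then s + q.2 else s) (0 : Int) =
      (pvMultD friends gifts).items.foldl
        (fun s q => s + (if q.1 < ia then q.2 else 0)) (0 : Int) := by
    apply PySem.List.foldl_congr_mem
    intro acc q _
    by_cases h : q.1 < ia <;> simp [h]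
  rw [hcongr, PySem.List.foldl_add, zero_add,
    PySem.Dict.items_eq_map_keys _ hnd 0, pv_multD_keys, List.map_map]
  have hmap : (PySem.Set.ofList ((pvDs friends).map (fun n => (pvIdxD gifts).getD n 0))).map
      ((fun q : Int × Int => if q.1 < ia then q.2 else 0) ∘
        (fun k => (k, (pvMultD friends gifts).getD k 0))) =
      (PySem.Set.ofList ((pvDs friends).map (fun n => (pvIdxD gifts).getD n 0))).map
        (fun v => if v < ia then
          ((pvDs friends).countP (fun n => (pvIdxD gifts).getD n 0 == v) : Int) else 0) := by
    apply List.map_congr_left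
    intro v _
    simp only [Function.comp_apply]
    rw [pv_multD_getD]
  rw [hmap, pv_sum_count_values _ (PySem.Set.nodup_ofList _)
    (fun n => (pvIdxD gifts).getD n 0) (fun v => v < ia) (pvDs friends)
    (fun n hn => (PySem.Set.mem_ofList _ _).mpr (List.mem_map_of_mem hn))]
  congr 1
  apply List.countP_congr
  intro n _
  rw [pv_idxD_fut]
theorem pv_adjStep_mem (ad : PySem.Dict String (PySem.Set String)) (p : String × String)
    (a x : String) :
    x ∈ (pvAdjStepB ad p).getD a PySem.Set.empty ↔
      x ∈ ad.getD a PySem.Set.empty ∨ (p.1 = a ∧ p.2 = x) ∨ (p.2 = a ∧ p.1 = x) := by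
  obtain ⟨u, v⟩ := p
  unfold pvAdjStepB
  simp only [PySem.Dict.getD_insert]
  split_ifs with h2 h21 h1 <;> (try simp only [PySem.Set.mem_add]) <;> aesop

theorem pv_adjStep_nodup (ad : PySem.Dict String (PySem.Set String)) (p : String × String)
    (h : ∀ y, (ad.getD y PySem.Set.empty).Nodup) :
    ∀ y, ((pvAdjStepB ad p).getD y PySem.Set.empty).Nodup := by
  intro y
  unfold pvAdjStepB
  simp only [PySem.Dict.getD_insert]
  by_cases hy2 : y = p.2
  · rw [if_pos hy2]
    apply PySem.Set.nodup_add
    by_cases h21 : p.2 = p.1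
    · rw [if_pos h21]
      exact PySem.Set.nodup_add _ _ (h _)
    · rw [if_neg h21]
      exact h _
  · rw [if_neg hy2]
    by_cases hy1 : y = p.1
    · rw [if_pos hy1]
      exact PySem.Set.nodup_add _ _ (h _)
    · rw [if_neg hy1]
      exact h _

theorem pv_adj_fold_mem (L : List (String × String)) :
    ∀ (ad : PySem.Dict String (PySem.Set String)) (a x : String),
      x ∈ (L.foldl pvAdjStepB ad).getD a PySem.Set.empty ↔
        x ∈ ad.getD a PySem.Set.empty ∨
          ∃ p ∈ L, (p.1 = a ∧ p.2 = x) ∨ (p.2 = a ∧ p.1 = x) := by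
  induction L with
  | nil => intro ad a x; simp
  | cons p t ih =>
    intro ad a x
    simp only [List.foldl_cons]
    rw [ih, pv_adjStep_mem]
    simp only [List.mem_cons]
    constructor
    · rintro ((h | h | h) | ⟨q, hq, hc⟩)
      · exact Or.inl h
      · exact Or.inr ⟨p, Or.inl rfl, Or.inl h⟩
      · exact Or.inr ⟨p, Or.inl rfl, Or.inr h⟩
      · exact Or.inr ⟨q, Or.inr hq, hc⟩
    · rintro (h | ⟨q, (hq | hq), hc⟩)
      · exact Or.inl (Or.inl h)
      · subst hq
        rcases hc with hc | hc
        · exact Or.inl (Or.inr (Or.inl hc))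
        · exact Or.inl (Or.inr (Or.inr hc))
      · exact Or.inr ⟨q, hq, hc⟩

theorem pv_adj_fold_nodup (L : List (String × String)) :
    ∀ (ad : PySem.Dict String (PySem.Set String)),
      (∀ y, (ad.getD y PySem.Set.empty).Nodup) →
      ∀ y, ((L.foldl pvAdjStepB ad).getD y PySem.Set.empty).Nodup := by
  induction L with
  | nil => intro ad h y; exact h y
  | cons p t ih =>
    intro ad h y
    simp only [List.foldl_cons]
    exact ih _ (pv_adjStep_nodup ad p h) y

theorem pv_adjA_mem (gifts : List String) (a x : String) :
    x ∈ pvAdjA gifts a ↔ 0 < pvCnt gifts x a ∨ 0 < pvCnt gifts a x := by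
  unfold pvAdjA pvAdjD
  rw [pv_adj_fold_mem]
  simp only [PySem.Dict.getD_empty]
  constructor
  · rintro (h | ⟨⟨p1, p2⟩, hp, hc⟩)
    · simp [PySem.Set.empty] at h
    · rcases hc with ⟨h1, h2⟩ | ⟨h2, h1⟩
      · have h1' : p1 = a := h1
        have h2' : p2 = x := h2
        rw [h1', h2'] at hp
        exact Or.inl ((pv_mem_pair_keys gifts a x).mp hp)
      · have h2' : p2 = a := h2
        have h1' : p1 = x := h1
        rw [h1', h2'] at hp
        exact Or.inr ((pv_mem_pair_keys gifts x a).mp hp)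
  · rintro (h | h)
    · exact Or.inr ⟨(a, x), (pv_mem_pair_keys gifts a x).mpr h, Or.inl ⟨rfl, rfl⟩⟩
    · exact Or.inr ⟨(x, a), (pv_mem_pair_keys gifts x a).mpr h, Or.inr ⟨rfl, rfl⟩⟩

theorem pv_adjA_nodup (gifts : List String) (a : String) : (pvAdjA gifts a).Nodup := by
  unfold pvAdjA pvAdjD
  exact pv_adj_fold_nodup _ PySem.Dict.empty
    (fun y => by rw [PySem.Dict.getD_empty]; exact List.nodup_nil) a
theorem pv_cond_iff (gifts : List String) (a b : String) :
    ((pvCnt gifts b a : Int) > (pvCnt gifts a b : Int) ∨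
      ((pvCnt gifts b a : Int) = (pvCnt gifts a b : Int) ∧
        pvFut gifts a > pvFut gifts b)) ↔ pvCond gifts a b = true := by
  unfold pvCond
  simp only [Bool.or_eq_true, Bool.and_eq_true, decide_eq_true_eq, gt_iff_lt]
  omega

theorem pv_sum_sub {α : Type} [DecidableEq α] (t : List α) :
    ∀ (s : List α), s.Nodup → t.Nodup → (∀ x ∈ s, x ∈ t) → ∀ (h : α → Int),
      (s.map h).sum = (t.map (fun b => if b ∈ s then h b else 0)).sum := by
  induction t with
  | nil =>
    intro s hs _ hsub h
    have : s = [] := List.eq_nil_iff_forall_not_mem.mpr (fun x hx => absurd (hsub x hx) List.not_mem_nil)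
    simp [this]
  | cons c t' ih =>
    intro s hs hT hsub h
    have hT' : t'.Nodup := (List.nodup_cons.mp hT).2
    have hcT' : c ∉ t' := (List.nodup_cons.mp hT).1
    by_cases hc : c ∈ s
    · have hperm : s.Perm (c :: s.erase c) := List.perm_cons_erase hc
      have hsum : (s.map h).sum = h c + ((s.erase c).map h).sum := by
        rw [List.Perm.sum_eq (hperm.map h)]
        simp
      have hse : (s.erase c).Nodup := hs.erase c
      have hsub' : ∀ x ∈ s.erase c, x ∈ t' := by
        intro x hx
        have hx' := (hs.mem_erase_iff).mp hx
        rcases List.mem_cons.mp (hsub x hx'.2) with h' | h'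
        · exact absurd h' hx'.1
        · exact h'
      have hcongr : t'.map (fun b => if b ∈ s.erase c then h b else 0) =
          t'.map (fun b => if b ∈ s then h b else 0) := by
        apply List.map_congr_left
        intro b hb
        have hbc : b ≠ c := fun hbc => hcT' (hbc ▸ hb)
        by_cases hbs : b ∈ s
        · rw [if_pos hbs, if_pos ((hs.mem_erase_iff).mpr ⟨hbc, hbs⟩)]
        · rw [if_neg hbs, if_neg (fun hx => hbs ((hs.mem_erase_iff).mp hx).2)]
      rw [hsum, ih (s.erase c) hse hT' hsub' h, hcongr]
      simp [hc]
    · have hsub' : ∀ x ∈ s, x ∈ t' := by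
        intro x hx
        rcases List.mem_cons.mp (hsub x hx) with h' | h'
        · exact absurd (h' ▸ hx) hc
        · exact h'
      rw [ih s hs hT' hsub' h]
      simp [hc]

theorem pv_sum_filter {α : Type} (l : List α) (q : α → Bool) (f : α → Int) :
    ((l.filter q).map f).sum = (l.map (fun b => if q b then f b else 0)).sum := by
  induction l with
  | nil => rfl
  | cons a t ih =>
    rw [List.filter_cons, List.map_cons, List.sum_cons]
    by_cases h : q a
    · rw [if_pos h, List.map_cons, List.sum_cons, ih, if_pos h]
    · rw [if_neg h, ih, if_neg h, zero_add]

theorem pv_countP_as_sum {α : Type} (l : List α) (p : α → Bool) :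
    (l.countP p : Int) = (l.map (fun b => if p b then (1 : Int) else 0)).sum := by
  induction l with
  | nil => rfl
  | cons a t ih =>
    rw [List.countP_cons, List.map_cons, List.sum_cons]
    by_cases h : p a <;> simp [h] <;> omega

theorem pv_corr_fold (gifts : List String) (a : String) (s0 : Int) :
    (pvAdjA gifts a).foldl (fun s b =>
        let gave := (pvPairD gifts).getD (a, b) 0
        let got := (pvPairD gifts).getD (b, a) 0
        let ib := (pvIdxD gifts).getD b 0
        let actual : Int :=
          if gave > got ∨ (gave = got ∧ (pvIdxD gifts).getD a 0 > ib) then 1 else 0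
        let base : Int := if (pvIdxD gifts).getD a 0 > ib then 1 else 0
        s + (actual - base)) s0 =
      s0 + ((pvAdjA gifts a).map (pvH gifts a)).sum := by
  have hcongr : (pvAdjA gifts a).foldl (fun s b =>
      let gave := (pvPairD gifts).getD (a, b) 0
      let got := (pvPairD gifts).getD (b, a) 0
      let ib := (pvIdxD gifts).getD b 0
      let actual : Int :=
        if gave > got ∨ (gave = got ∧ (pvIdxD gifts).getD a 0 > ib) then 1 else 0
      let base : Int := if (pvIdxD gifts).getD a 0 > ib then 1 else 0
      s + (actual - base)) s0 =
      (pvAdjA gifts a).foldl (fun s b => s + pvH gifts a b) s0 := by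
    apply PySem.List.foldl_congr_mem
    intro acc b _
    simp only
    unfold pvH
    rw [pv_pairD_getD gifts a b, pv_pairD_getD gifts b a, pv_idxD_fut gifts a,
      pv_idxD_fut gifts b]
    have h1 : (if (pvCnt gifts b a : Int) > (pvCnt gifts a b : Int) ∨
        ((pvCnt gifts b a : Int) = (pvCnt gifts a b : Int) ∧ pvFut gifts a > pvFut gifts b)
        then (1 : Int) else 0) = (if pvCond gifts a b then 1 else 0) := by
      by_cases hP : (pvCnt gifts b a : Int) > (pvCnt gifts a b : Int) ∨
          ((pvCnt gifts b a : Int) = (pvCnt gifts a b : Int) ∧ pvFut gifts a > pvFut gifts b)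
      · rw [if_pos hP, if_pos ((pv_cond_iff gifts a b).mp hP)]
      · rw [if_neg hP, if_neg (fun hc => hP ((pv_cond_iff gifts a b).mpr hc))]
    have h2 : (if pvFut gifts a > pvFut gifts b then (1 : Int) else 0) =
        (if pvFut gifts b < pvFut gifts a then 1 else 0) := by
      simp [gt_iff_lt]
    rw [h1, h2]
  rw [hcongr, PySem.List.foldl_add]
theorem pv_bscore_eq (friends gifts : List String)
    (hg : ∀ g ∈ gifts, pvTok0 g ∈ friends ∧ pvTok1 g ∈ friends ∧ pvTok0 g ≠ pvTok1 g)
    (a : String) : pvBScore friends gifts a = pvScore friends gifts a := by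
  have h1 : pvBScore friends gifts a =
      ((pvDs friends).countP (fun n => decide (pvFut gifts n < pvFut gifts a)) : Int) +
        ((pvAdjA gifts a).map (pvH gifts a)).sum := by
    unfold pvBScore
    rw [pv_corr_fold, pv_baseline, pv_idxD_fut]
  have hLnd : ((pvDs friends).filter (fun y => decide (a ≠ y))).Nodup :=
    (pv_ds_nodup friends).filter _
  have hsub : ∀ x ∈ pvAdjA gifts a,
      x ∈ (pvDs friends).filter (fun y => decide (a ≠ y)) := by
    intro x hx
    rw [pv_adjA_mem] at hx
    rcases hx with h | h
    · obtain ⟨g, hgm, hp⟩ := List.countP_pos_iff.mp h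
      have h1 : pvTok1 g = x ∧ pvTok0 g = a := by simpa using hp
      have hgg := hg g hgm
      rw [List.mem_filter]
      refine ⟨(PySem.Set.mem_ofList _ _).mpr (h1.1 ▸ hgg.2.1), ?_⟩
      simp only [decide_eq_true_eq]
      intro hax
      exact hgg.2.2 (h1.2.trans (hax.trans h1.1.symm))
    · obtain ⟨g, hgm, hp⟩ := List.countP_pos_iff.mp h
      have h1 : pvTok1 g = a ∧ pvTok0 g = x := by simpa using hp
      have hgg := hg g hgm
      rw [List.mem_filter]
      refine ⟨(PySem.Set.mem_ofList _ _).mpr (h1.2 ▸ hgg.1), ?_⟩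
      simp only [decide_eq_true_eq]
      intro hax
      exact hgg.2.2 (h1.2.trans (hax.symm.trans h1.1.symm))
  have hbase : ((pvDs friends).countP (fun n => decide (pvFut gifts n < pvFut gifts a)) : Int)
      = (((pvDs friends).filter (fun y => decide (a ≠ y))).map
          (fun b => if pvFut gifts b < pvFut gifts a then (1 : Int) else 0)).sum := by
    rw [pv_countP_as_sum, pv_sum_filter]
    apply congrArg List.sum
    apply List.map_congr_left
    intro b _
    by_cases hab : a = b
    · subst hab
      simp
    · simp [hab]
  have hadj : ((pvAdjA gifts a).map (pvH gifts a)).sum =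
      (((pvDs friends).filter (fun y => decide (a ≠ y))).map
        (fun b => if b ∈ pvAdjA gifts a then pvH gifts a b else 0)).sum :=
    pv_sum_sub _ (pvAdjA gifts a) (pv_adjA_nodup gifts a) hLnd hsub (pvH gifts a)
  rw [h1, hbase, hadj, ← PySem.List.sum_map_add_int]
  have hpt : ((pvDs friends).filter (fun y => decide (a ≠ y))).map
      (fun b => (if pvFut gifts b < pvFut gifts a then (1 : Int) else 0) +
        (if b ∈ pvAdjA gifts a then pvH gifts a b else 0)) =
      ((pvDs friends).filter (fun y => decide (a ≠ y))).map
        (fun b => if pvCond gifts a b then (1 : Int) else 0) := by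
    apply List.map_congr_left
    intro b _
    by_cases hm : b ∈ pvAdjA gifts a
    · rw [if_pos hm]
      unfold pvH
      ring
    · rw [if_neg hm, add_zero]
      rw [pv_adjA_mem] at hm
      push_neg at hm
      have hz1 : pvCnt gifts b a = 0 := Nat.le_zero.mp hm.1
      have hz2 : pvCnt gifts a b = 0 := Nat.le_zero.mp hm.2
      have hcond : pvCond gifts a b = decide (pvFut gifts b < pvFut gifts a) := by
        unfold pvCond
        rw [hz1, hz2]
        simp [gt_iff_lt]
      rw [hcond]
      by_cases hf : pvFut gifts b < pvFut gifts a <;> simp [hf]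
  rw [hpt, ← pv_countP_as_sum]
  rfl

theorem pv_alt_eq (friends gifts : List String)
    (hg : ∀ g ∈ gifts, pvTok0 g ∈ friends ∧ pvTok1 g ∈ friends ∧ pvTok0 g ≠ pvTok1 g) :
    solution_alt friends gifts = pvAnswer friends gifts := by
  rw [pv_alt_pipeline]
  have hA : pvAnswer friends gifts =
      (pvDs friends).foldl (fun best x => max best (pvScore friends gifts x)) 0 := by
    rw [pvAnswer, List.foldl_map]
  rw [hA]
  apply PySem.List.foldl_congr_mem
  intro acc x hx
  rw [pv_bscore_eq friends gifts hg x]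

-- ===== VERDICT (by name: the statement is the Claim_ definition above) =====
theorem solution_spec : Claim_equal_solution := by
  intro friends gifts _ hPre
  unfold Pre_solution at hPre
  unfold Spec_solution
  have hg : ∀ g ∈ gifts, pvTok0 g ∈ friends ∧ pvTok1 g ∈ friends ∧ pvTok0 g ≠ pvTok1 g :=
    fun g h => ⟨(hPre.2 g h).2.1, (hPre.2 g h).2.2.1, (hPre.2 g h).2.2.2⟩
  rw [pv_solution_eq friends gifts hg hPre.1, pv_alt_eq friends gifts hg]
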